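-- pv_equiv track=rewrite | github.com/heeya15/Algorithm_Study | 2022_10_Study/221019/박동준_programmers_행렬 테두리 회전하기.py | solution
-- ===== SOURCE A (Python) =====
-- def solution(rows, columns, queries):
--     answer = []
--
--     table =  []
--     count = 1
--     for i in range(rows):
--         column = []
--         for j in range(columns):
--             column.append(count)
--             count += 1
--         table.append(column)
--
--
--     for query in queries:
--         query = [x-1 for x in query] # 0부터 시작하는 인덱스에 맞춰 1씩 빼줌
--         tmp = table[query[0]][query[1]] # 왼쪽 위 값 저장
--         small = tmp
--
--         # left
--         for i in range(query[0]+1, query[2]+1):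
--             table[i-1][query[1]] = table[i][query[1]]
--             small = min(small, table[i][query[1]])
--         # bottom
--         for i in range(query[1]+1, query[3]+1):
--             table[query[2]][i-1] = table[query[2]][i]
--             small = min(small, table[query[2]][i])
--         # right
--         for i in range(query[2]-1, query[0]-1, -1):
--             table[i+1][query[3]] = table[i][query[3]]
--             small = min(small, table[i][query[3]])
--         # top
--         for i in range(query[3]-1, query[1]-1, -1):
--             table[query[0]][i+1] = table[query[0]][i]
--             small = min(small, table[query[0]][i])
--         table[query[0]][query[1]+1] = tmp
--
--         answer.append(small)
--
--     return answer
-- ===== SOURCE B (Python) =====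
-- def solution(rows, columns, queries):
--     # B: extract each rectangle border into an explicit ring buffer (clockwise),
--     # take its min, rotate the buffer by one, and write it back in one pass.
--     table = [[r * columns + c + 1 for c in range(columns)] for r in range(rows)]
--     answer = []
--     for x1, y1, x2, y2 in queries:
--         x1 -= 1; y1 -= 1; x2 -= 1; y2 -= 1
--         coords = ([(x1, j) for j in range(y1, y2)]
--                   + [(i, y2) for i in range(x1, x2)]
--                   + [(x2, j) for j in range(y2, y1, -1)]
--                   + [(i, y1) for i in range(x2, x1, -1)])
--         vals = [table[i][j] for i, j in coords]
--         answer.append(min(vals))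
--         rotated = vals[-1:] + vals[:-1]
--         for (i, j), v in zip(coords, rotated):
--             table[i][j] = v
--     return answer
-- ===== Notes on version B (the rewrite author's own statement) =====
-- stated objective: alternative
-- what changed: Instead of A's four interleaved read-shift loops that rotate the border in place while tracking a running min, B extracts the rectangle's perimeter into an explicit clockwise ring buffer, takes min() of that buffer, rotates the buffer by one, and writes it back in a single pass; the table is also built by a closed-form comprehension instead of A's running counter.
-- outside the precondition, e.g. on solution(2, 2, [[1, 1, 2, 2, 7]]): A returns [1], B raises ValueError; on solution(5, 2, [[2, 1, 5, 0]]): A returns [3], B returns [4]; on solution(5, 5, [[5, 1, 5, 1]]): A returns [21], B raises ValueError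
import Mathlib
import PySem

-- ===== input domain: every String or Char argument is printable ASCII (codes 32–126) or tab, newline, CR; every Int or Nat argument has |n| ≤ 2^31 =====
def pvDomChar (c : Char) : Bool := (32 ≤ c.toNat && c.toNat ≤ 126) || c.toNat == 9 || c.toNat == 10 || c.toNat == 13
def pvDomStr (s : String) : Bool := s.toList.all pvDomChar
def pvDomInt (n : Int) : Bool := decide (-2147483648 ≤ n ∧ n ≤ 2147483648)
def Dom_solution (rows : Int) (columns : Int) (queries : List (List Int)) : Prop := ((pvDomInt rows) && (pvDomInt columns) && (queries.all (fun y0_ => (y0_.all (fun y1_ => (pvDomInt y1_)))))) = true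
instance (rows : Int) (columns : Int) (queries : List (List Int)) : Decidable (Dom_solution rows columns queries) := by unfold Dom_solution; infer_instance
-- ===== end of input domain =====

-- B extracts each rectangle border into an explicit clockwise ring buffer, takes its min, rotates
-- it by one and writes it back in one pass (A shifts the border in place with four interleaved
-- read-shift loops); same cost, different decomposition.


-- shared table-cell access helpers: 'table[i][j]' and 'table[i][j] = v' (both Pythons use exactly these)
def cellGet (t : List (List Int)) (i j : Int) : Int :=
  PySem.List.pyGetD (PySem.List.pyGetD t i []) j 0

def cellSet (t : List (List Int)) (i j : Int) (v : Int) : List (List Int) :=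
  PySem.List.pySetD t i (PySem.List.pySetD (PySem.List.pyGetD t i []) j v)

-- ===== PORT A =====
def solution (rows : Int) (columns : Int) (queries : List (List Int)) : List Int :=
  let init : List (List Int) × Int :=
    (PySem.List.pyRange 0 rows 1).foldl
      (fun (st : List (List Int) × Int) _i =>
        let cc : List Int × Int :=
          (PySem.List.pyRange 0 columns 1).foldl
            (fun (cs : List Int × Int) _j => (cs.1 ++ [cs.2], cs.2 + 1)) ([], st.2)
        (st.1 ++ [cc.1], cc.2))
      ([], 1)
  let fin : List Int × List (List Int) :=
    queries.foldl
      (fun (st : List Int × List (List Int)) (query : List Int) =>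
        let q := query.map (fun x => x - 1)
        let q0 := PySem.List.pyGetD q 0 0
        let q1 := PySem.List.pyGetD q 1 0
        let q2 := PySem.List.pyGetD q 2 0
        let q3 := PySem.List.pyGetD q 3 0
        let tmp := cellGet st.2 q0 q1
        -- left
        let l : List (List Int) × Int :=
          (PySem.List.pyRange (q0 + 1) (q2 + 1) 1).foldl
            (fun (ts : List (List Int) × Int) i =>
              let t' := cellSet ts.1 (i - 1) q1 (cellGet ts.1 i q1)
              (t', min ts.2 (cellGet t' i q1)))
            (st.2, tmp)
        -- bottom
        let b : List (List Int) × Int :=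
          (PySem.List.pyRange (q1 + 1) (q3 + 1) 1).foldl
            (fun (ts : List (List Int) × Int) i =>
              let t' := cellSet ts.1 q2 (i - 1) (cellGet ts.1 q2 i)
              (t', min ts.2 (cellGet t' q2 i)))
            l
        -- right
        let r : List (List Int) × Int :=
          (PySem.List.pyRange (q2 - 1) (q0 - 1) (-1)).foldl
            (fun (ts : List (List Int) × Int) i =>
              let t' := cellSet ts.1 (i + 1) q3 (cellGet ts.1 i q3)
              (t', min ts.2 (cellGet t' i q3)))
            b
        -- top
        let tp : List (List Int) × Int :=
          (PySem.List.pyRange (q3 - 1) (q1 - 1) (-1)).foldl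
            (fun (ts : List (List Int) × Int) i =>
              let t' := cellSet ts.1 q0 (i + 1) (cellGet ts.1 q0 i)
              (t', min ts.2 (cellGet t' q0 i)))
            r
        let t2 := cellSet tp.1 q0 (q1 + 1) tmp
        (st.1 ++ [tp.2], t2))
      ([], init.1)
  fin.1

-- ===== PORT B =====
def solution_alt (rows : Int) (columns : Int) (queries : List (List Int)) : List Int :=
  let table0 : List (List Int) :=
    (PySem.List.pyRange 0 rows 1).map
      (fun r => (PySem.List.pyRange 0 columns 1).map (fun c => r * columns + c + 1))
  let fin : List Int × List (List Int) :=
    queries.foldl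
      (fun (st : List Int × List (List Int)) (query : List Int) =>
        match query with
        | [a, b, c, d] =>
          let x1 := a - 1
          let y1 := b - 1
          let x2 := c - 1
          let y2 := d - 1
          let coords : List (Int × Int) :=
            (PySem.List.pyRange y1 y2 1).map (fun j => (x1, j))
              ++ (PySem.List.pyRange x1 x2 1).map (fun i => (i, y2))
              ++ (PySem.List.pyRange y2 y1 (-1)).map (fun j => (x2, j))
              ++ (PySem.List.pyRange x2 x1 (-1)).map (fun i => (i, y1))
          let vals : List Int := coords.map (fun crd => cellGet st.2 crd.1 crd.2)
          let m : Int := (PySem.List.min? vals (fun x => x)).getD 0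
          let rotated : List Int :=
            PySem.List.slice vals (some (-1)) none ++ PySem.List.slice vals none (some (-1))
          let t2 : List (List Int) :=
            (coords.zip rotated).foldl (fun t cv => cellSet t cv.1.1 cv.1.2 cv.2) st.2
          (st.1 ++ [m], t2)
        | _ => st)
      ([], table0)
  fin.1

-- ===== PRECONDITION & SPEC =====
-- Pre_ restricts queries to the problem's stated domain: exactly four coordinates forming a
-- non-degenerate in-bounds rectangle (1 ≤ x1 < x2 ≤ rows, 1 ≤ y1 < y2 ≤ columns). Outside it A
-- either raises or returns accidental values (extra query elements silently ignored,
-- negative-index wraparound, degenerate/reversed rectangles), where B raises or differs.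
def Pre_solution (rows : Int) (columns : Int) (queries : List (List Int)) : Prop :=
  ∀ q ∈ queries, q.length = 4 ∧ 1 ≤ q.getD 0 0 ∧ q.getD 0 0 < q.getD 2 0 ∧ q.getD 2 0 ≤ rows ∧
    1 ≤ q.getD 1 0 ∧ q.getD 1 0 < q.getD 3 0 ∧ q.getD 3 0 ≤ columns

instance (rows : Int) (columns : Int) (queries : List (List Int)) : Decidable (Pre_solution rows columns queries) := by
  unfold Pre_solution; infer_instance

def pvWitness_solution : Int × Int × List (List Int) := (3, 3, [[1, 1, 2, 3], [1, 1, 3, 3]])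

def Spec_solution (rows : Int) (columns : Int) (queries : List (List Int)) (out : List Int) : Prop := out = solution_alt rows columns queries
instance (rows : Int) (columns : Int) (queries : List (List Int)) (out : List Int) : Decidable (Spec_solution rows columns queries out) := by unfold Spec_solution; infer_instance

-- ===== CLAIM (what is proved, stated in full; the proofs are below) =====
def Claim_equal_solution : Prop := ∀ (rows : Int) (columns : Int) (queries : List (List Int)), Dom_solution rows columns queries → Pre_solution rows columns queries → Spec_solution rows columns queries (solution rows columns queries)

-- ===== LEMMAS AND PROOFS =====

-- table shape: 'rows' rows, each of length 'columns'
def Shaped (R C : Int) (t : List (List Int)) : Prop :=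
  t.length = R.toNat ∧ ∀ r ∈ t, r.length = C.toNat

lemma cellSet_shaped {R C : Int} {t : List (List Int)} (h : Shaped R C t)
    {i j : Int} (hi0 : 0 ≤ i) (v : Int) :
    Shaped R C (cellSet t i j v) := by
  constructor
  · unfold cellSet; rw [PySem.List.length_pySetD]; exact h.1
  · intro rr hmem
    unfold cellSet at hmem
    rw [PySem.List.pySetD_of_nonneg _ _ hi0] at hmem
    by_cases hin : i < t.length
    · rcases List.mem_or_eq_of_mem_set hmem with h' | h'
      · exact h.2 _ h'
      · subst h'
        rw [PySem.List.length_pySetD]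
        exact h.2 _ (PySem.List.pyGetD_mem t [] ⟨by omega, by exact_mod_cast hin⟩)
    · rw [List.set_eq_of_length_le (by omega)] at hmem
      exact h.2 _ hmem

lemma cellGet_cellSet {R C : Int} {t : List (List Int)} (h : Shaped R C t)
    {i j : Int} (hi0 : 0 ≤ i) (hiR : i < R) (hj0 : 0 ≤ j) (hjC : j < C)
    (v : Int) {p q : Int} (hp0 : 0 ≤ p) (hq0 : 0 ≤ q) :
    cellGet (cellSet t i j v) p q = if p = i ∧ q = j then v else cellGet t p q := by
  obtain ⟨n, rfl⟩ : ∃ n : Nat, i = (n : Int) := ⟨i.toNat, by omega⟩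
  obtain ⟨k, rfl⟩ : ∃ k : Nat, j = (k : Int) := ⟨j.toNat, by omega⟩
  obtain ⟨m, rfl⟩ : ∃ m : Nat, p = (m : Int) := ⟨p.toNat, by omega⟩
  obtain ⟨l, rfl⟩ : ∃ l : Nat, q = (l : Int) := ⟨q.toNat, by omega⟩
  have hiN : n < t.length := by have := h.1; omega
  have hrow : PySem.List.pyGetD t (n : Int) [] ∈ t :=
    PySem.List.pyGetD_mem t [] ⟨by omega, by exact_mod_cast hiN⟩
  have hjN : k < (PySem.List.pyGetD t (n : Int) []).length := by
    have := h.2 _ hrow; omega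
  unfold cellGet cellSet
  rw [PySem.List.pyGetD_pySetD_natCast t n m _ [] hiN]
  by_cases hmn : m = n
  · subst hmn
    rw [if_pos rfl, PySem.List.pyGetD_pySetD_natCast _ k l v 0 hjN]
    by_cases hkl : l = k
    · subst hkl; simp
    · rw [if_neg hkl, if_neg (by simp [hkl])]
  · rw [if_neg hmn, if_neg (by simp [hmn])]

-- generic form of one of A's shift loops: write cell (w i) := current value of cell (r i), then
-- fold the (freshly written) value of cell (r i) into the running min
def stepA {ι : Type} (w r : ι → Int × Int) : (List (List Int) × Int) → ι → (List (List Int) × Int) :=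
  fun ts i =>
    let t' := cellSet ts.1 (w i).1 (w i).2 (cellGet ts.1 (r i).1 (r i).2)
    (t', min ts.2 (cellGet t' (r i).1 (r i).2))

lemma loopA_shape {ι : Type} {R C : Int} (L : List ι) (w r : ι → Int × Int)
    {ts : List (List Int) × Int} (hsh : Shaped R C ts.1)
    (hwB : ∀ i ∈ L, 0 ≤ (w i).1 ∧ (w i).1 < R ∧ 0 ≤ (w i).2 ∧ (w i).2 < C) :
    Shaped R C ((L.foldl (stepA w r) ts).1) := by
  induction L generalizing ts with
  | nil => exact hsh
  | cons a L ih =>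
    simp only [List.foldl_cons, stepA]
    exact ih (cellSet_shaped hsh (hwB a (by simp)).1 _) (fun i hi => hwB i (by simp [hi]))

lemma loopA_snd {ι : Type} {R C : Int} (L : List ι) (w r : ι → Int × Int)
    {ts : List (List Int) × Int} (hsh : Shaped R C ts.1)
    (hwB : ∀ i ∈ L, 0 ≤ (w i).1 ∧ (w i).1 < R ∧ 0 ≤ (w i).2 ∧ (w i).2 < C)
    (hrB : ∀ i ∈ L, 0 ≤ (r i).1 ∧ 0 ≤ (r i).2)
    (hwr : ∀ i ∈ L, w i ≠ r i)
    (hpw : L.Pairwise (fun i1 i2 => w i1 ≠ r i2 ∧ w i1 ≠ w i2)) :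
    (L.foldl (stepA w r) ts).2
      = L.foldl (fun s i => min s (cellGet ts.1 (r i).1 (r i).2)) ts.2 := by
  induction L generalizing ts with
  | nil => rfl
  | cons a L ih =>
    have hwa := hwB a (by simp)
    have hra := hrB a (by simp)
    have hne : ¬((r a).1 = (w a).1 ∧ (r a).2 = (w a).2) := by
      intro hc; exact hwr a (by simp) (Prod.ext hc.1.symm hc.2.symm)
    have hpwh := (List.pairwise_cons.mp hpw).1
    have hpwt := (List.pairwise_cons.mp hpw).2
    simp only [List.foldl_cons, stepA]
    have hread : cellGet (cellSet ts.1 (w a).1 (w a).2 (cellGet ts.1 (r a).1 (r a).2)) (r a).1 (r a).2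
        = cellGet ts.1 (r a).1 (r a).2 := by
      rw [cellGet_cellSet hsh hwa.1 hwa.2.1 hwa.2.2.1 hwa.2.2.2 _ hra.1 hra.2, if_neg hne]
    rw [hread]
    rw [ih (cellSet_shaped hsh hwa.1 _) (fun i hi => hwB i (by simp [hi]))
        (fun i hi => hrB i (by simp [hi])) (fun i hi => hwr i (by simp [hi])) hpwt]
    exact PySem.List.foldl_congr_mem L _ _ _ (by
      intro acc i hi
      have := (hpwh i hi).1
      have hri := hrB i (by simp [hi])
      rw [cellGet_cellSet hsh hwa.1 hwa.2.1 hwa.2.2.1 hwa.2.2.2 _ hri.1 hri.2,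
        if_neg (by intro hc; exact (hpwh i hi).1 (Prod.ext hc.1.symm hc.2.symm))])

lemma loopA_get_nmem {ι : Type} {R C : Int} (L : List ι) (w r : ι → Int × Int)
    {ts : List (List Int) × Int} (hsh : Shaped R C ts.1)
    (hwB : ∀ i ∈ L, 0 ≤ (w i).1 ∧ (w i).1 < R ∧ 0 ≤ (w i).2 ∧ (w i).2 < C)
    {p q : Int} (hp0 : 0 ≤ p) (hq0 : 0 ≤ q) (hnm : ∀ i ∈ L, w i ≠ (p, q)) :
    cellGet ((L.foldl (stepA w r) ts).1) p q = cellGet ts.1 p q := by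
  induction L generalizing ts with
  | nil => rfl
  | cons a L ih =>
    have hwa := hwB a (by simp)
    simp only [List.foldl_cons, stepA]
    rw [ih (cellSet_shaped hsh hwa.1 _) (fun i hi => hwB i (by simp [hi]))
        (fun i hi => hnm i (by simp [hi]))]
    rw [cellGet_cellSet hsh hwa.1 hwa.2.1 hwa.2.2.1 hwa.2.2.2 _ hp0 hq0,
      if_neg (by intro hc; exact hnm a (by simp) (Prod.ext hc.1.symm hc.2.symm))]

lemma loopA_get_mem {ι : Type} {R C : Int} (L : List ι) (w r : ι → Int × Int)
    {ts : List (List Int) × Int} (hsh : Shaped R C ts.1)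
    (hwB : ∀ i ∈ L, 0 ≤ (w i).1 ∧ (w i).1 < R ∧ 0 ≤ (w i).2 ∧ (w i).2 < C)
    (hrB : ∀ i ∈ L, 0 ≤ (r i).1 ∧ 0 ≤ (r i).2)
    (hwr : ∀ i ∈ L, w i ≠ r i)
    (hpw : L.Pairwise (fun i1 i2 => w i1 ≠ r i2 ∧ w i1 ≠ w i2))
    {p q : Int} {i0 : ι} (hm : i0 ∈ L) (hw : w i0 = (p, q)) :
    cellGet ((L.foldl (stepA w r) ts).1) p q = cellGet ts.1 (r i0).1 (r i0).2 := by
  induction L generalizing ts with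
  | nil => cases hm
  | cons a L ih =>
    have hwa := hwB a (by simp)
    have hra := hrB a (by simp)
    have hpwh := (List.pairwise_cons.mp hpw).1
    have hpwt := (List.pairwise_cons.mp hpw).2
    have hp0 : 0 ≤ p := by have := hwB i0 hm; rw [hw] at this; exact this.1
    have hq0 : 0 ≤ q := by have := hwB i0 hm; rw [hw] at this; exact this.2.2.1
    simp only [List.foldl_cons, stepA]
    rcases List.mem_cons.mp hm with rfl | hm'
    · rw [loopA_get_nmem L w r (cellSet_shaped hsh hwa.1 _)
        (fun i hi => hwB i (by simp [hi])) hp0 hq0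
        (fun i hi => by have := (hpwh i hi).2; rw [hw] at this; exact fun hc => this (hc ▸ rfl))]
      rw [cellGet_cellSet hsh hwa.1 hwa.2.1 hwa.2.2.1 hwa.2.2.2 _ hp0 hq0,
        if_pos (by rw [hw]; exact ⟨rfl, rfl⟩)]
    · rw [ih (cellSet_shaped hsh hwa.1 _) (fun i hi => hwB i (by simp [hi]))
        (fun i hi => hrB i (by simp [hi])) (fun i hi => hwr i (by simp [hi])) hpwt hm']
      have hri := hrB i0 (by simp [hm'])
      rw [cellGet_cellSet hsh hwa.1 hwa.2.1 hwa.2.2.1 hwa.2.2.2 _ hri.1 hri.2,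
        if_neg (by intro hc; exact (hpwh i0 hm').1 (Prod.ext hc.1.symm hc.2.symm))]

-- generic form of B's write-back pass: write cell cv.1 := cv.2 (precomputed values)
def stepW : List (List Int) → ((Int × Int) × Int) → List (List Int) :=
  fun t cv => cellSet t cv.1.1 cv.1.2 cv.2

lemma write_shape {R C : Int} (L : List ((Int × Int) × Int))
    {t : List (List Int)} (hsh : Shaped R C t)
    (hwB : ∀ cv ∈ L, 0 ≤ cv.1.1 ∧ cv.1.1 < R ∧ 0 ≤ cv.1.2 ∧ cv.1.2 < C) :
    Shaped R C (L.foldl stepW t) := by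
  induction L generalizing t with
  | nil => exact hsh
  | cons a L ih =>
    simp only [List.foldl_cons, stepW]
    exact ih (cellSet_shaped hsh (hwB a (by simp)).1 _) (fun cv h => hwB cv (by simp [h]))

lemma write_get_nmem {R C : Int} (L : List ((Int × Int) × Int))
    {t : List (List Int)} (hsh : Shaped R C t)
    (hwB : ∀ cv ∈ L, 0 ≤ cv.1.1 ∧ cv.1.1 < R ∧ 0 ≤ cv.1.2 ∧ cv.1.2 < C)
    {p q : Int} (hp0 : 0 ≤ p) (hq0 : 0 ≤ q) (hnm : ∀ cv ∈ L, cv.1 ≠ (p, q)) :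
    cellGet (L.foldl stepW t) p q = cellGet t p q := by
  induction L generalizing t with
  | nil => rfl
  | cons a L ih =>
    have hwa := hwB a (by simp)
    simp only [List.foldl_cons, stepW]
    rw [ih (cellSet_shaped hsh hwa.1 _) (fun cv h => hwB cv (by simp [h]))
        (fun cv h => hnm cv (by simp [h]))]
    rw [cellGet_cellSet hsh hwa.1 hwa.2.1 hwa.2.2.1 hwa.2.2.2 _ hp0 hq0,
      if_neg (by intro hc; exact hnm a (by simp) (Prod.ext hc.1.symm hc.2.symm))]

lemma write_get_mem {R C : Int} (L : List ((Int × Int) × Int))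
    {t : List (List Int)} (hsh : Shaped R C t)
    (hwB : ∀ cv ∈ L, 0 ≤ cv.1.1 ∧ cv.1.1 < R ∧ 0 ≤ cv.1.2 ∧ cv.1.2 < C)
    (hpw : L.Pairwise (fun c1 c2 => c1.1 ≠ c2.1))
    {p q : Int} {cv0 : (Int × Int) × Int} (hm : cv0 ∈ L) (hw : cv0.1 = (p, q)) :
    cellGet (L.foldl stepW t) p q = cv0.2 := by
  induction L generalizing t with
  | nil => cases hm
  | cons a L ih =>
    have hwa := hwB a (by simp)
    have hpwh := (List.pairwise_cons.mp hpw).1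
    have hpwt := (List.pairwise_cons.mp hpw).2
    have hp0 : 0 ≤ p := by have := hwB cv0 hm; rw [hw] at this; exact this.1
    have hq0 : 0 ≤ q := by have := hwB cv0 hm; rw [hw] at this; exact this.2.2.1
    simp only [List.foldl_cons, stepW]
    rcases List.mem_cons.mp hm with rfl | hm'
    · rw [write_get_nmem L (cellSet_shaped hsh hwa.1 _)
        (fun cv h => hwB cv (by simp [h])) hp0 hq0
        (fun cv h => by have := hpwh cv h; rw [hw] at this; exact fun hc => this (hc ▸ rfl))]
      rw [cellGet_cellSet hsh hwa.1 hwa.2.1 hwa.2.2.1 hwa.2.2.2 _ hp0 hq0,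
        if_pos ⟨by rw [hw], by rw [hw]⟩]
    · rw [ih (cellSet_shaped hsh hwa.1 _) (fun cv h => hwB cv (by simp [h])) hpwt hm']

-- snoc decomposition of a countdown range
lemma pyRange_neg_one_snoc (a b : Int) (h : b < a) :
    PySem.List.pyRange a b (-1) = PySem.List.pyRange a (b + 1) (-1) ++ [b + 1] := by
  rw [PySem.List.pyRange_neg_one a b, PySem.List.pyRange_neg_one a (b + 1)]
  have hn : (a - b).toNat = (a - (b + 1)).toNat + 1 := by omega
  rw [hn, List.range_succ, List.map_append]
  congr 1
  simp only [List.map_cons, List.map_nil]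
  congr 1
  omega

-- descending ranges are pairwise decreasing
lemma pairwise_gt_pyRange_neg_one (a b : Int) :
    (PySem.List.pyRange a b (-1)).Pairwise (fun x1 x2 => x2 < x1) := by
  rw [PySem.List.pyRange_neg_one, List.pairwise_map]
  exact List.pairwise_lt_range.imp (by intro k1 k2 h; omega)

-- what one border rotation does to a single cell: every ring cell receives the old value of the
-- clockwise-previous ring cell, all other cells are untouched
def ringNew (t : List (List Int)) (x1 y1 x2 y2 p q : Int) : Int :=
  if p = x1 ∧ y1 + 1 ≤ q ∧ q ≤ y2 then cellGet t x1 (q - 1)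
  else if q = y2 ∧ x1 + 1 ≤ p ∧ p ≤ x2 then cellGet t (p - 1) y2
  else if p = x2 ∧ y1 ≤ q ∧ q ≤ y2 - 1 then cellGet t x2 (q + 1)
  else if q = y1 ∧ x1 ≤ p ∧ p ≤ x2 - 1 then cellGet t (p + 1) y1
  else cellGet t p q

lemma table_ext {R C : Int} {t1 t2 : List (List Int)} (h1 : Shaped R C t1) (h2 : Shaped R C t2)
    (hg : ∀ p q : Int, 0 ≤ p → p < R → 0 ≤ q → q < C → cellGet t1 p q = cellGet t2 p q) :
    t1 = t2 := by
  have hlen : t1.length = t2.length := by rw [h1.1, h2.1]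
  apply List.ext_getElem hlen
  intro n hn1 hn2
  have hrow1 : t1[n].length = C.toNat := h1.2 _ (List.getElem_mem hn1)
  have hrow2 : t2[n].length = C.toNat := h2.2 _ (List.getElem_mem hn2)
  apply List.ext_getElem (by rw [hrow1, hrow2])
  intro m hm1 hm2
  have e1 : cellGet t1 (n : Int) (m : Int) = t1[n][m] := by
    unfold cellGet
    rw [PySem.List.pyGetD_eq_getElem t1 [] (Int.natCast_nonneg n) (by exact_mod_cast hn1)]
    simp only [Int.toNat_natCast]
    rw [PySem.List.pyGetD_eq_getElem _ 0 (Int.natCast_nonneg m) (by exact_mod_cast hm1)]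
    simp only [Int.toNat_natCast]
  have e2 : cellGet t2 (n : Int) (m : Int) = t2[n][m] := by
    unfold cellGet
    rw [PySem.List.pyGetD_eq_getElem t2 [] (Int.natCast_nonneg n) (by exact_mod_cast hn2)]
    simp only [Int.toNat_natCast]
    rw [PySem.List.pyGetD_eq_getElem _ 0 (Int.natCast_nonneg m) (by exact_mod_cast hm2)]
    simp only [Int.toNat_natCast]
  have hR := h1.1
  rw [← e1, ← e2]
  exact hg _ _ (Int.natCast_nonneg n) (by omega) (Int.natCast_nonneg m) (by omega)

-- A's whole per-query transformation, written with the generic loop step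
def aQuery (t : List (List Int)) (x1 y1 x2 y2 : Int) : List (List Int) × Int :=
  let tmp := cellGet t x1 y1
  let l := (PySem.List.pyRange (x1 + 1) (x2 + 1) 1).foldl
      (stepA (fun i => (i - 1, y1)) (fun i => (i, y1))) (t, tmp)
  let b := (PySem.List.pyRange (y1 + 1) (y2 + 1) 1).foldl
      (stepA (fun i => (x2, i - 1)) (fun i => (x2, i))) l
  let r := (PySem.List.pyRange (x2 - 1) (x1 - 1) (-1)).foldl
      (stepA (fun i => (i + 1, y2)) (fun i => (i, y2))) b
  let tp := (PySem.List.pyRange (y2 - 1) (y1 - 1) (-1)).foldl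
      (stepA (fun i => (x1, i + 1)) (fun i => (x1, i))) r
  (cellSet tp.1 x1 (y1 + 1) tmp, tp.2)

-- B's whole per-query transformation
def bQuery (t : List (List Int)) (x1 y1 x2 y2 : Int) : List (List Int) × Int :=
  let coords : List (Int × Int) :=
    (PySem.List.pyRange y1 y2 1).map (fun j => (x1, j))
      ++ (PySem.List.pyRange x1 x2 1).map (fun i => (i, y2))
      ++ (PySem.List.pyRange y2 y1 (-1)).map (fun j => (x2, j))
      ++ (PySem.List.pyRange x2 x1 (-1)).map (fun i => (i, y1))
  let vals : List Int := coords.map (fun crd => cellGet t crd.1 crd.2)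
  let m : Int := (PySem.List.min? vals (fun x => x)).getD 0
  let rotated : List Int :=
    PySem.List.slice vals (some (-1)) none ++ PySem.List.slice vals none (some (-1))
  ((coords.zip rotated).foldl stepW t, m)

def aInit (rows columns : Int) : List (List Int) :=
  ((PySem.List.pyRange 0 rows 1).foldl
    (fun (st : List (List Int) × Int) _i =>
      let cc : List Int × Int :=
        (PySem.List.pyRange 0 columns 1).foldl
          (fun (cs : List Int × Int) _j => (cs.1 ++ [cs.2], cs.2 + 1)) ([], st.2)
      (st.1 ++ [cc.1], cc.2))
    ([], 1)).1

def bTable0 (rows columns : Int) : List (List Int) :=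
  (PySem.List.pyRange 0 rows 1).map
    (fun r => (PySem.List.pyRange 0 columns 1).map (fun c => r * columns + c + 1))

def aStep : (List Int × List (List Int)) → List Int → (List Int × List (List Int)) :=
  fun st query =>
    let q := query.map (fun x => x - 1)
    let q0 := PySem.List.pyGetD q 0 0
    let q1 := PySem.List.pyGetD q 1 0
    let q2 := PySem.List.pyGetD q 2 0
    let q3 := PySem.List.pyGetD q 3 0
    let tmp := cellGet st.2 q0 q1
    let l : List (List Int) × Int :=
      (PySem.List.pyRange (q0 + 1) (q2 + 1) 1).foldl
        (fun (ts : List (List Int) × Int) i =>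
          let t' := cellSet ts.1 (i - 1) q1 (cellGet ts.1 i q1)
          (t', min ts.2 (cellGet t' i q1)))
        (st.2, tmp)
    let b : List (List Int) × Int :=
      (PySem.List.pyRange (q1 + 1) (q3 + 1) 1).foldl
        (fun (ts : List (List Int) × Int) i =>
          let t' := cellSet ts.1 q2 (i - 1) (cellGet ts.1 q2 i)
          (t', min ts.2 (cellGet t' q2 i)))
        l
    let r : List (List Int) × Int :=
      (PySem.List.pyRange (q2 - 1) (q0 - 1) (-1)).foldl
        (fun (ts : List (List Int) × Int) i =>
          let t' := cellSet ts.1 (i + 1) q3 (cellGet ts.1 i q3)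
          (t', min ts.2 (cellGet t' i q3)))
        b
    let tp : List (List Int) × Int :=
      (PySem.List.pyRange (q3 - 1) (q1 - 1) (-1)).foldl
        (fun (ts : List (List Int) × Int) i =>
          let t' := cellSet ts.1 q0 (i + 1) (cellGet ts.1 q0 i)
          (t', min ts.2 (cellGet t' q0 i)))
        r
    let t2 := cellSet tp.1 q0 (q1 + 1) tmp
    (st.1 ++ [tp.2], t2)

def bStep : (List Int × List (List Int)) → List Int → (List Int × List (List Int)) :=
  fun st query =>
    match query with
    | [a, b, c, d] =>
      let x1 := a - 1
      let y1 := b - 1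
      let x2 := c - 1
      let y2 := d - 1
      let coords : List (Int × Int) :=
        (PySem.List.pyRange y1 y2 1).map (fun j => (x1, j))
          ++ (PySem.List.pyRange x1 x2 1).map (fun i => (i, y2))
          ++ (PySem.List.pyRange y2 y1 (-1)).map (fun j => (x2, j))
          ++ (PySem.List.pyRange x2 x1 (-1)).map (fun i => (i, y1))
      let vals : List Int := coords.map (fun crd => cellGet st.2 crd.1 crd.2)
      let m : Int := (PySem.List.min? vals (fun x => x)).getD 0
      let rotated : List Int :=
        PySem.List.slice vals (some (-1)) none ++ PySem.List.slice vals none (some (-1))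
      let t2 : List (List Int) :=
        (coords.zip rotated).foldl (fun t cv => cellSet t cv.1.1 cv.1.2 cv.2) st.2
      (st.1 ++ [m], t2)
    | _ => st

lemma solution_unfold (rows columns : Int) (queries : List (List Int)) :
    solution rows columns queries = (queries.foldl aStep ([], aInit rows columns)).1 := rfl

lemma solution_alt_unfold (rows columns : Int) (queries : List (List Int)) :
    solution_alt rows columns queries = (queries.foldl bStep ([], bTable0 rows columns)).1 := rfl

lemma aStep_quad (ans : List Int) (t : List (List Int)) (a b c d : Int) :
    aStep (ans, t) [a, b, c, d]
      = (ans ++ [(aQuery t (a - 1) (b - 1) (c - 1) (d - 1)).2],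
         (aQuery t (a - 1) (b - 1) (c - 1) (d - 1)).1) := rfl

lemma bStep_quad (ans : List Int) (t : List (List Int)) (a b c d : Int) :
    bStep (ans, t) [a, b, c, d]
      = (ans ++ [(bQuery t (a - 1) (b - 1) (c - 1) (d - 1)).2],
         (bQuery t (a - 1) (b - 1) (c - 1) (d - 1)).1) := rfl

-- ---------- A side: the four interleaved loops act as one clockwise ring rotation ----------

lemma aQuery_get {R C : Int} {t : List (List Int)} (hsh : Shaped R C t)
    {x1 y1 x2 y2 : Int} (hx10 : 0 ≤ x1) (hx12 : x1 < x2) (hx2R : x2 < R)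
    (hy10 : 0 ≤ y1) (hy12 : y1 < y2) (hy2C : y2 < C)
    {p q : Int} (hp0 : 0 ≤ p) (hq0 : 0 ≤ q) :
    cellGet (aQuery t x1 y1 x2 y2).1 p q = ringNew t x1 y1 x2 y2 p q := by
  have hB1 : ∀ i ∈ PySem.List.pyRange (x1 + 1) (x2 + 1) 1,
      0 ≤ ((fun i => (i - 1, y1)) i).1 ∧ ((fun i => (i - 1, y1)) i).1 < R ∧
      0 ≤ ((fun i => (i - 1, y1)) i).2 ∧ ((fun i => (i - 1, y1)) i).2 < C := by
    intro i hi; rw [PySem.List.mem_pyRange_one] at hi; dsimp only; omega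
  have hB2 : ∀ i ∈ PySem.List.pyRange (y1 + 1) (y2 + 1) 1,
      0 ≤ ((fun i => (x2, i - 1)) i).1 ∧ ((fun i => (x2, i - 1)) i).1 < R ∧
      0 ≤ ((fun i => (x2, i - 1)) i).2 ∧ ((fun i => (x2, i - 1)) i).2 < C := by
    intro i hi; rw [PySem.List.mem_pyRange_one] at hi; dsimp only; omega
  have hB3 : ∀ i ∈ PySem.List.pyRange (x2 - 1) (x1 - 1) (-1),
      0 ≤ ((fun i => (i + 1, y2)) i).1 ∧ ((fun i => (i + 1, y2)) i).1 < R ∧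
      0 ≤ ((fun i => (i + 1, y2)) i).2 ∧ ((fun i => (i + 1, y2)) i).2 < C := by
    intro i hi; rw [PySem.List.mem_pyRange_neg_one] at hi; dsimp only; omega
  have hB4 : ∀ i ∈ PySem.List.pyRange (y2 - 1) (y1 - 1) (-1),
      0 ≤ ((fun i => (x1, i + 1)) i).1 ∧ ((fun i => (x1, i + 1)) i).1 < R ∧
      0 ≤ ((fun i => (x1, i + 1)) i).2 ∧ ((fun i => (x1, i + 1)) i).2 < C := by
    intro i hi; rw [PySem.List.mem_pyRange_neg_one] at hi; dsimp only; omega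
  have hr1 : ∀ i ∈ PySem.List.pyRange (x1 + 1) (x2 + 1) 1,
      0 ≤ ((fun i => (i, y1)) i).1 ∧ 0 ≤ ((fun i => (i, y1)) i).2 := by
    intro i hi; rw [PySem.List.mem_pyRange_one] at hi; dsimp only; omega
  have hr2 : ∀ i ∈ PySem.List.pyRange (y1 + 1) (y2 + 1) 1,
      0 ≤ ((fun i => (x2, i)) i).1 ∧ 0 ≤ ((fun i => (x2, i)) i).2 := by
    intro i hi; rw [PySem.List.mem_pyRange_one] at hi; dsimp only; omega
  have hr3 : ∀ i ∈ PySem.List.pyRange (x2 - 1) (x1 - 1) (-1),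
      0 ≤ ((fun i => (i, y2)) i).1 ∧ 0 ≤ ((fun i => (i, y2)) i).2 := by
    intro i hi; rw [PySem.List.mem_pyRange_neg_one] at hi; dsimp only; omega
  have hr4 : ∀ i ∈ PySem.List.pyRange (y2 - 1) (y1 - 1) (-1),
      0 ≤ ((fun i => (x1, i)) i).1 ∧ 0 ≤ ((fun i => (x1, i)) i).2 := by
    intro i hi; rw [PySem.List.mem_pyRange_neg_one] at hi; dsimp only; omega
  have hwr1 : ∀ i ∈ PySem.List.pyRange (x1 + 1) (x2 + 1) 1,
      (fun i => (i - 1, y1)) i ≠ (fun i => (i, y1)) i := by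
    intro i hi; simp only [ne_eq, Prod.mk.injEq]; omega
  have hwr2 : ∀ i ∈ PySem.List.pyRange (y1 + 1) (y2 + 1) 1,
      (fun i => (x2, i - 1)) i ≠ (fun i => (x2, i)) i := by
    intro i hi; simp only [ne_eq, Prod.mk.injEq]; omega
  have hwr3 : ∀ i ∈ PySem.List.pyRange (x2 - 1) (x1 - 1) (-1),
      (fun i => (i + 1, y2)) i ≠ (fun i => (i, y2)) i := by
    intro i hi; simp only [ne_eq, Prod.mk.injEq]; omega
  have hwr4 : ∀ i ∈ PySem.List.pyRange (y2 - 1) (y1 - 1) (-1),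
      (fun i => (x1, i + 1)) i ≠ (fun i => (x1, i)) i := by
    intro i hi; simp only [ne_eq, Prod.mk.injEq]; omega
  have hpw1 : (PySem.List.pyRange (x1 + 1) (x2 + 1) 1).Pairwise
      (fun i1 i2 => (fun i => (i - 1, y1)) i1 ≠ (fun i => (i, y1)) i2 ∧
                    (fun i => (i - 1, y1)) i1 ≠ (fun i => (i - 1, y1)) i2) :=
    (PySem.List.pairwise_lt_pyRange_one _ _).imp
      (fun h => ⟨by simp only [ne_eq, Prod.mk.injEq]; omega, by simp only [ne_eq, Prod.mk.injEq]; omega⟩)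
  have hpw2 : (PySem.List.pyRange (y1 + 1) (y2 + 1) 1).Pairwise
      (fun i1 i2 => (fun i => (x2, i - 1)) i1 ≠ (fun i => (x2, i)) i2 ∧
                    (fun i => (x2, i - 1)) i1 ≠ (fun i => (x2, i - 1)) i2) :=
    (PySem.List.pairwise_lt_pyRange_one _ _).imp
      (fun h => ⟨by simp only [ne_eq, Prod.mk.injEq]; omega, by simp only [ne_eq, Prod.mk.injEq]; omega⟩)
  have hpw3 : (PySem.List.pyRange (x2 - 1) (x1 - 1) (-1)).Pairwise
      (fun i1 i2 => (fun i => (i + 1, y2)) i1 ≠ (fun i => (i, y2)) i2 ∧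
                    (fun i => (i + 1, y2)) i1 ≠ (fun i => (i + 1, y2)) i2) :=
    (pairwise_gt_pyRange_neg_one _ _).imp
      (fun h => ⟨by simp only [ne_eq, Prod.mk.injEq]; omega, by simp only [ne_eq, Prod.mk.injEq]; omega⟩)
  have hpw4 : (PySem.List.pyRange (y2 - 1) (y1 - 1) (-1)).Pairwise
      (fun i1 i2 => (fun i => (x1, i + 1)) i1 ≠ (fun i => (x1, i)) i2 ∧
                    (fun i => (x1, i + 1)) i1 ≠ (fun i => (x1, i + 1)) i2) :=
    (pairwise_gt_pyRange_neg_one _ _).imp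
      (fun h => ⟨by simp only [ne_eq, Prod.mk.injEq]; omega, by simp only [ne_eq, Prod.mk.injEq]; omega⟩)
  have hs1 : Shaped R C (((PySem.List.pyRange (x1 + 1) (x2 + 1) 1).foldl
      (stepA (fun i => (i - 1, y1)) (fun i => (i, y1))) (t, cellGet t x1 y1)).1) :=
    loopA_shape _ _ _ hsh hB1
  have hs2 : Shaped R C (((PySem.List.pyRange (y1 + 1) (y2 + 1) 1).foldl
      (stepA (fun i => (x2, i - 1)) (fun i => (x2, i)))
      ((PySem.List.pyRange (x1 + 1) (x2 + 1) 1).foldl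
        (stepA (fun i => (i - 1, y1)) (fun i => (i, y1))) (t, cellGet t x1 y1))).1) :=
    loopA_shape _ _ _ hs1 hB2
  have hs3 : Shaped R C (((PySem.List.pyRange (x2 - 1) (x1 - 1) (-1)).foldl
      (stepA (fun i => (i + 1, y2)) (fun i => (i, y2)))
      ((PySem.List.pyRange (y1 + 1) (y2 + 1) 1).foldl
        (stepA (fun i => (x2, i - 1)) (fun i => (x2, i)))
        ((PySem.List.pyRange (x1 + 1) (x2 + 1) 1).foldl
          (stepA (fun i => (i - 1, y1)) (fun i => (i, y1))) (t, cellGet t x1 y1)))).1) :=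
    loopA_shape _ _ _ hs2 hB3
  have hs4 : Shaped R C (((PySem.List.pyRange (y2 - 1) (y1 - 1) (-1)).foldl
      (stepA (fun i => (x1, i + 1)) (fun i => (x1, i)))
      ((PySem.List.pyRange (x2 - 1) (x1 - 1) (-1)).foldl
        (stepA (fun i => (i + 1, y2)) (fun i => (i, y2)))
        ((PySem.List.pyRange (y1 + 1) (y2 + 1) 1).foldl
          (stepA (fun i => (x2, i - 1)) (fun i => (x2, i)))
          ((PySem.List.pyRange (x1 + 1) (x2 + 1) 1).foldl
            (stepA (fun i => (i - 1, y1)) (fun i => (i, y1))) (t, cellGet t x1 y1))))).1) :=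
    loopA_shape _ _ _ hs3 hB4
  unfold aQuery ringNew
  dsimp only
  by_cases h1 : p = x1 ∧ y1 + 1 ≤ q ∧ q ≤ y2
  · rw [if_pos h1]
    obtain ⟨hp, hq1, hq2⟩ := h1
    subst hp
    by_cases hq3 : q = y1 + 1
    · subst hq3
      rw [cellGet_cellSet hs4 hx10 (by omega) (by omega) (by omega) _ hp0 hq0,
        if_pos ⟨rfl, rfl⟩, show y1 + 1 - 1 = y1 from by omega]
    · rw [cellGet_cellSet hs4 hx10 (by omega) (by omega) (by omega) _ hp0 hq0,
        if_neg (fun hc => hq3 hc.2)]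
      rw [loopA_get_mem _ _ _ hs3 hB4 hr4 hwr4 hpw4 (i0 := q - 1)
        (by rw [PySem.List.mem_pyRange_neg_one]; omega)
        (by rw [show q - 1 + 1 = q from by omega])]
      rw [loopA_get_nmem _ _ _ hs2 hB3 hx10 (by omega)
        (fun i hi => by rw [PySem.List.mem_pyRange_neg_one] at hi
                        simp only [ne_eq, Prod.mk.injEq]; omega)]
      rw [loopA_get_nmem _ _ _ hs1 hB2 hx10 (by omega)
        (fun i hi => by rw [PySem.List.mem_pyRange_one] at hi
                        simp only [ne_eq, Prod.mk.injEq]; omega)]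
      rw [loopA_get_nmem _ _ _ hsh hB1 hx10 (by omega)
        (fun i hi => by rw [PySem.List.mem_pyRange_one] at hi
                        simp only [ne_eq, Prod.mk.injEq]; omega)]
  · rw [if_neg h1]
    by_cases h2 : q = y2 ∧ x1 + 1 ≤ p ∧ p ≤ x2
    · rw [if_pos h2]
      obtain ⟨hq, hp1, hp2⟩ := h2
      subst hq
      rw [cellGet_cellSet hs4 hx10 (by omega) (by omega) (by omega) _ hp0 hq0,
        if_neg (by simp only [not_and]; intro h _; omega)]
      rw [loopA_get_nmem _ _ _ hs3 hB4 hp0 hq0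
        (fun i hi => by rw [PySem.List.mem_pyRange_neg_one] at hi
                        simp only [ne_eq, Prod.mk.injEq]; omega)]
      rw [loopA_get_mem _ _ _ hs2 hB3 hr3 hwr3 hpw3 (i0 := p - 1)
        (by rw [PySem.List.mem_pyRange_neg_one]; omega)
        (by rw [show p - 1 + 1 = p from by omega])]
      rw [loopA_get_nmem _ _ _ hs1 hB2 (by omega) (by omega)
        (fun i hi => by rw [PySem.List.mem_pyRange_one] at hi
                        simp only [ne_eq, Prod.mk.injEq]; omega)]
      rw [loopA_get_nmem _ _ _ hsh hB1 (by omega) (by omega)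
        (fun i hi => by rw [PySem.List.mem_pyRange_one] at hi
                        simp only [ne_eq, Prod.mk.injEq]; omega)]
    · rw [if_neg h2]
      by_cases h3 : p = x2 ∧ y1 ≤ q ∧ q ≤ y2 - 1
      · rw [if_pos h3]
        obtain ⟨hp, hq1, hq2⟩ := h3
        subst hp
        rw [cellGet_cellSet hs4 hx10 (by omega) (by omega) (by omega) _ hp0 hq0,
          if_neg (by simp only [not_and]; intro h _; omega)]
        rw [loopA_get_nmem _ _ _ hs3 hB4 hp0 hq0
          (fun i hi => by rw [PySem.List.mem_pyRange_neg_one] at hi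
                          simp only [ne_eq, Prod.mk.injEq]; omega)]
        rw [loopA_get_nmem _ _ _ hs2 hB3 hp0 hq0
          (fun i hi => by rw [PySem.List.mem_pyRange_neg_one] at hi
                          simp only [ne_eq, Prod.mk.injEq]; omega)]
        rw [loopA_get_mem _ _ _ hs1 hB2 hr2 hwr2 hpw2 (i0 := q + 1)
          (by rw [PySem.List.mem_pyRange_one]; omega)
          (by rw [show q + 1 - 1 = q from by omega])]
        rw [loopA_get_nmem _ _ _ hsh hB1 (by omega) (by omega)
          (fun i hi => by rw [PySem.List.mem_pyRange_one] at hi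
                          simp only [ne_eq, Prod.mk.injEq]; omega)]
      · rw [if_neg h3]
        by_cases h4 : q = y1 ∧ x1 ≤ p ∧ p ≤ x2 - 1
        · rw [if_pos h4]
          obtain ⟨hq, hp1, hp2⟩ := h4
          subst hq
          rw [cellGet_cellSet hs4 hx10 (by omega) (by omega) (by omega) _ hp0 hq0,
            if_neg (by simp only [not_and]; intro _ h; omega)]
          rw [loopA_get_nmem _ _ _ hs3 hB4 hp0 hq0
            (fun i hi => by rw [PySem.List.mem_pyRange_neg_one] at hi
                            simp only [ne_eq, Prod.mk.injEq]; omega)]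
          rw [loopA_get_nmem _ _ _ hs2 hB3 hp0 hq0
            (fun i hi => by rw [PySem.List.mem_pyRange_neg_one] at hi
                            simp only [ne_eq, Prod.mk.injEq]; omega)]
          rw [loopA_get_nmem _ _ _ hs1 hB2 hp0 hq0
            (fun i hi => by rw [PySem.List.mem_pyRange_one] at hi
                            simp only [ne_eq, Prod.mk.injEq]; omega)]
          rw [loopA_get_mem _ _ _ hsh hB1 hr1 hwr1 hpw1 (i0 := p + 1)
            (by rw [PySem.List.mem_pyRange_one]; omega)
            (by rw [show p + 1 - 1 = p from by omega])]
        · rw [if_neg h4]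
          rw [cellGet_cellSet hs4 hx10 (by omega) (by omega) (by omega) _ hp0 hq0,
            if_neg (fun hc => h1 ⟨hc.1, by omega⟩)]
          rw [loopA_get_nmem _ _ _ hs3 hB4 hp0 hq0
            (fun i hi => by rw [PySem.List.mem_pyRange_neg_one] at hi
                            simp only [ne_eq, Prod.mk.injEq]; omega)]
          rw [loopA_get_nmem _ _ _ hs2 hB3 hp0 hq0
            (fun i hi => by rw [PySem.List.mem_pyRange_neg_one] at hi
                            simp only [ne_eq, Prod.mk.injEq]; omega)]
          rw [loopA_get_nmem _ _ _ hs1 hB2 hp0 hq0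
            (fun i hi => by rw [PySem.List.mem_pyRange_one] at hi
                            simp only [ne_eq, Prod.mk.injEq]; omega)]
          rw [loopA_get_nmem _ _ _ hsh hB1 hp0 hq0
            (fun i hi => by rw [PySem.List.mem_pyRange_one] at hi
                            simp only [ne_eq, Prod.mk.injEq]; omega)]

lemma loopA_snd_reads {ι : Type} {R C : Int} (L : List ι) (w r : ι → Int × Int)
    {ts : List (List Int) × Int} (hsh : Shaped R C ts.1)
    (hwB : ∀ i ∈ L, 0 ≤ (w i).1 ∧ (w i).1 < R ∧ 0 ≤ (w i).2 ∧ (w i).2 < C)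
    (hrB : ∀ i ∈ L, 0 ≤ (r i).1 ∧ 0 ≤ (r i).2)
    (hwr : ∀ i ∈ L, w i ≠ r i)
    (hpw : L.Pairwise (fun i1 i2 => w i1 ≠ r i2 ∧ w i1 ≠ w i2))
    (G : ι → Int) (hG : ∀ i ∈ L, cellGet ts.1 (r i).1 (r i).2 = G i) :
    (L.foldl (stepA w r) ts).2 = L.foldl (fun s i => min s (G i)) ts.2 := by
  rw [loopA_snd _ _ _ hsh hwB hrB hwr hpw]
  exact PySem.List.foldl_congr_mem _ _ _ _ (fun acc i hi => by rw [hG i hi])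

set_option maxHeartbeats 16000000 in
lemma aQuery_snd {R C : Int} {t : List (List Int)} (hsh : Shaped R C t)
    {x1 y1 x2 y2 : Int} (hx10 : 0 ≤ x1) (hx12 : x1 < x2) (hx2R : x2 < R)
    (hy10 : 0 ≤ y1) (hy12 : y1 < y2) (hy2C : y2 < C) :
    (aQuery t x1 y1 x2 y2).2
      = (((PySem.List.pyRange (x1 + 1) (x2 + 1) 1).map (fun i => cellGet t i y1)
          ++ (PySem.List.pyRange (y1 + 1) (y2 + 1) 1).map (fun i => cellGet t x2 i)
          ++ (PySem.List.pyRange (x2 - 1) (x1 - 1) (-1)).map (fun i => cellGet t i y2)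
          ++ (PySem.List.pyRange (y2 - 1) y1 (-1)).map (fun i => cellGet t x1 i))
         ++ [cellGet t (x1 + 1) y1]).foldl min (cellGet t x1 y1) := by
  have hB1 : ∀ i ∈ PySem.List.pyRange (x1 + 1) (x2 + 1) 1,
      0 ≤ ((fun i => (i - 1, y1)) i).1 ∧ ((fun i => (i - 1, y1)) i).1 < R ∧
      0 ≤ ((fun i => (i - 1, y1)) i).2 ∧ ((fun i => (i - 1, y1)) i).2 < C := by
    intro i hi; rw [PySem.List.mem_pyRange_one] at hi; dsimp only; omega
  have hB2 : ∀ i ∈ PySem.List.pyRange (y1 + 1) (y2 + 1) 1,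
      0 ≤ ((fun i => (x2, i - 1)) i).1 ∧ ((fun i => (x2, i - 1)) i).1 < R ∧
      0 ≤ ((fun i => (x2, i - 1)) i).2 ∧ ((fun i => (x2, i - 1)) i).2 < C := by
    intro i hi; rw [PySem.List.mem_pyRange_one] at hi; dsimp only; omega
  have hB3 : ∀ i ∈ PySem.List.pyRange (x2 - 1) (x1 - 1) (-1),
      0 ≤ ((fun i => (i + 1, y2)) i).1 ∧ ((fun i => (i + 1, y2)) i).1 < R ∧
      0 ≤ ((fun i => (i + 1, y2)) i).2 ∧ ((fun i => (i + 1, y2)) i).2 < C := by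
    intro i hi; rw [PySem.List.mem_pyRange_neg_one] at hi; dsimp only; omega
  have hB4 : ∀ i ∈ PySem.List.pyRange (y2 - 1) (y1 - 1) (-1),
      0 ≤ ((fun i => (x1, i + 1)) i).1 ∧ ((fun i => (x1, i + 1)) i).1 < R ∧
      0 ≤ ((fun i => (x1, i + 1)) i).2 ∧ ((fun i => (x1, i + 1)) i).2 < C := by
    intro i hi; rw [PySem.List.mem_pyRange_neg_one] at hi; dsimp only; omega
  have hr1 : ∀ i ∈ PySem.List.pyRange (x1 + 1) (x2 + 1) 1,
      0 ≤ ((fun i => (i, y1)) i).1 ∧ 0 ≤ ((fun i => (i, y1)) i).2 := by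
    intro i hi; rw [PySem.List.mem_pyRange_one] at hi; dsimp only; omega
  have hr2 : ∀ i ∈ PySem.List.pyRange (y1 + 1) (y2 + 1) 1,
      0 ≤ ((fun i => (x2, i)) i).1 ∧ 0 ≤ ((fun i => (x2, i)) i).2 := by
    intro i hi; rw [PySem.List.mem_pyRange_one] at hi; dsimp only; omega
  have hr3 : ∀ i ∈ PySem.List.pyRange (x2 - 1) (x1 - 1) (-1),
      0 ≤ ((fun i => (i, y2)) i).1 ∧ 0 ≤ ((fun i => (i, y2)) i).2 := by
    intro i hi; rw [PySem.List.mem_pyRange_neg_one] at hi; dsimp only; omega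
  have hr4 : ∀ i ∈ PySem.List.pyRange (y2 - 1) (y1 - 1) (-1),
      0 ≤ ((fun i => (x1, i)) i).1 ∧ 0 ≤ ((fun i => (x1, i)) i).2 := by
    intro i hi; rw [PySem.List.mem_pyRange_neg_one] at hi; dsimp only; omega
  have hwr1 : ∀ i ∈ PySem.List.pyRange (x1 + 1) (x2 + 1) 1,
      (fun i => (i - 1, y1)) i ≠ (fun i => (i, y1)) i := by
    intro i hi; simp only [ne_eq, Prod.mk.injEq]; omega
  have hwr2 : ∀ i ∈ PySem.List.pyRange (y1 + 1) (y2 + 1) 1,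
      (fun i => (x2, i - 1)) i ≠ (fun i => (x2, i)) i := by
    intro i hi; simp only [ne_eq, Prod.mk.injEq]; omega
  have hwr3 : ∀ i ∈ PySem.List.pyRange (x2 - 1) (x1 - 1) (-1),
      (fun i => (i + 1, y2)) i ≠ (fun i => (i, y2)) i := by
    intro i hi; simp only [ne_eq, Prod.mk.injEq]; omega
  have hwr4 : ∀ i ∈ PySem.List.pyRange (y2 - 1) (y1 - 1) (-1),
      (fun i => (x1, i + 1)) i ≠ (fun i => (x1, i)) i := by
    intro i hi; simp only [ne_eq, Prod.mk.injEq]; omega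
  have hpw1 : (PySem.List.pyRange (x1 + 1) (x2 + 1) 1).Pairwise
      (fun i1 i2 => (fun i => (i - 1, y1)) i1 ≠ (fun i => (i, y1)) i2 ∧
                    (fun i => (i - 1, y1)) i1 ≠ (fun i => (i - 1, y1)) i2) :=
    (PySem.List.pairwise_lt_pyRange_one _ _).imp
      (fun h => ⟨by simp only [ne_eq, Prod.mk.injEq]; omega, by simp only [ne_eq, Prod.mk.injEq]; omega⟩)
  have hpw2 : (PySem.List.pyRange (y1 + 1) (y2 + 1) 1).Pairwise
      (fun i1 i2 => (fun i => (x2, i - 1)) i1 ≠ (fun i => (x2, i)) i2 ∧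
                    (fun i => (x2, i - 1)) i1 ≠ (fun i => (x2, i - 1)) i2) :=
    (PySem.List.pairwise_lt_pyRange_one _ _).imp
      (fun h => ⟨by simp only [ne_eq, Prod.mk.injEq]; omega, by simp only [ne_eq, Prod.mk.injEq]; omega⟩)
  have hpw3 : (PySem.List.pyRange (x2 - 1) (x1 - 1) (-1)).Pairwise
      (fun i1 i2 => (fun i => (i + 1, y2)) i1 ≠ (fun i => (i, y2)) i2 ∧
                    (fun i => (i + 1, y2)) i1 ≠ (fun i => (i + 1, y2)) i2) :=
    (pairwise_gt_pyRange_neg_one _ _).imp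
      (fun h => ⟨by simp only [ne_eq, Prod.mk.injEq]; omega, by simp only [ne_eq, Prod.mk.injEq]; omega⟩)
  have hpw4 : (PySem.List.pyRange (y2 - 1) (y1 - 1) (-1)).Pairwise
      (fun i1 i2 => (fun i => (x1, i + 1)) i1 ≠ (fun i => (x1, i)) i2 ∧
                    (fun i => (x1, i + 1)) i1 ≠ (fun i => (x1, i + 1)) i2) :=
    (pairwise_gt_pyRange_neg_one _ _).imp
      (fun h => ⟨by simp only [ne_eq, Prod.mk.injEq]; omega, by simp only [ne_eq, Prod.mk.injEq]; omega⟩)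
  have hs1 : Shaped R C (((PySem.List.pyRange (x1 + 1) (x2 + 1) 1).foldl
      (stepA (fun i => (i - 1, y1)) (fun i => (i, y1))) (t, cellGet t x1 y1)).1) :=
    loopA_shape _ _ _ hsh hB1
  have hs2 : Shaped R C (((PySem.List.pyRange (y1 + 1) (y2 + 1) 1).foldl
      (stepA (fun i => (x2, i - 1)) (fun i => (x2, i)))
      ((PySem.List.pyRange (x1 + 1) (x2 + 1) 1).foldl
        (stepA (fun i => (i - 1, y1)) (fun i => (i, y1))) (t, cellGet t x1 y1))).1) :=
    loopA_shape _ _ _ hs1 hB2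
  have hs3 : Shaped R C (((PySem.List.pyRange (x2 - 1) (x1 - 1) (-1)).foldl
      (stepA (fun i => (i + 1, y2)) (fun i => (i, y2)))
      ((PySem.List.pyRange (y1 + 1) (y2 + 1) 1).foldl
        (stepA (fun i => (x2, i - 1)) (fun i => (x2, i)))
        ((PySem.List.pyRange (x1 + 1) (x2 + 1) 1).foldl
          (stepA (fun i => (i - 1, y1)) (fun i => (i, y1))) (t, cellGet t x1 y1)))).1) :=
    loopA_shape _ _ _ hs2 hB3
  have hsnd4 := loopA_snd_reads _ _ _ hs3 hB4 hr4 hwr4 hpw4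
      (G := fun i => if i = y1 then cellGet t (x1 + 1) y1 else cellGet t x1 i)
      (fun i hi => by
        dsimp only
        rw [PySem.List.mem_pyRange_neg_one] at hi
        by_cases hiy : i = y1
        · subst hiy
          rw [if_pos rfl]
          rw [loopA_get_nmem _ _ _ hs2 hB3 hx10 hy10
            (fun j hj => by rw [PySem.List.mem_pyRange_neg_one] at hj
                            simp only [ne_eq, Prod.mk.injEq]; omega)]
          rw [loopA_get_nmem _ _ _ hs1 hB2 hx10 hy10
            (fun j hj => by rw [PySem.List.mem_pyRange_one] at hj
                            simp only [ne_eq, Prod.mk.injEq]; omega)]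
          rw [loopA_get_mem _ _ _ hsh hB1 hr1 hwr1 hpw1 (i0 := x1 + 1)
            (by rw [PySem.List.mem_pyRange_one]; omega)
            (by rw [show x1 + 1 - 1 = x1 from by omega])]
        · rw [if_neg hiy]
          rw [loopA_get_nmem _ _ _ hs2 hB3 hx10 (by omega)
            (fun j hj => by rw [PySem.List.mem_pyRange_neg_one] at hj
                            simp only [ne_eq, Prod.mk.injEq]; omega)]
          rw [loopA_get_nmem _ _ _ hs1 hB2 hx10 (by omega)
            (fun j hj => by rw [PySem.List.mem_pyRange_one] at hj
                            simp only [ne_eq, Prod.mk.injEq]; omega)]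
          rw [loopA_get_nmem _ _ _ hsh hB1 hx10 (by omega)
            (fun j hj => by rw [PySem.List.mem_pyRange_one] at hj
                            simp only [ne_eq, Prod.mk.injEq]; omega)])
  have hsnd3 := loopA_snd_reads _ _ _ hs2 hB3 hr3 hwr3 hpw3
      (G := fun i => cellGet t i y2)
      (fun i hi => by
        dsimp only
        rw [PySem.List.mem_pyRange_neg_one] at hi
        rw [loopA_get_nmem _ _ _ hs1 hB2 (by omega) (by omega)
          (fun j hj => by rw [PySem.List.mem_pyRange_one] at hj
                          simp only [ne_eq, Prod.mk.injEq]; omega)]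
        rw [loopA_get_nmem _ _ _ hsh hB1 (by omega) (by omega)
          (fun j hj => by rw [PySem.List.mem_pyRange_one] at hj
                          simp only [ne_eq, Prod.mk.injEq]; omega)])
  have hsnd2 := loopA_snd_reads _ _ _ hs1 hB2 hr2 hwr2 hpw2
      (G := fun i => cellGet t x2 i)
      (fun i hi => by
        dsimp only
        rw [PySem.List.mem_pyRange_one] at hi
        rw [loopA_get_nmem _ _ _ hsh hB1 (by omega) (by omega)
          (fun j hj => by rw [PySem.List.mem_pyRange_one] at hj
                          simp only [ne_eq, Prod.mk.injEq]; omega)])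
  have hsnd1 := loopA_snd_reads (ts := (t, cellGet t x1 y1)) _ _ _ hsh hB1 hr1 hwr1 hpw1
      (G := fun i => cellGet t i y1) (fun i hi => rfl)
  unfold aQuery
  dsimp only
  rw [hsnd4, hsnd3, hsnd2, hsnd1]
  -- split the top loop's range at its last index y1 and evaluate the if
  have hL4 : PySem.List.pyRange (y2 - 1) (y1 - 1) (-1)
      = PySem.List.pyRange (y2 - 1) y1 (-1) ++ [y1] := by
    have h := pyRange_neg_one_snoc (y2 - 1) (y1 - 1) (by omega)
    rw [show y1 - 1 + 1 = y1 from by omega] at h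
    exact h
  rw [hL4]
  simp only [List.foldl_append, List.foldl_map, List.foldl_cons, List.foldl_nil, if_true]
  congr 1
  exact PySem.List.foldl_congr_mem _ _ _ _ (fun acc i hi => by
    rw [PySem.List.mem_pyRange_neg_one] at hi
    rw [if_neg (by omega)])

-- ---------- B side: the zip of coordinates with the rotated buffer, as an explicit list ----------

lemma zip_map_shift_asc {α β : Type} (a b : Int) (F : Int → α) (G : Int → β) :
    (((PySem.List.pyRange (a + 1) (b + 1) 1).map F).zip ((PySem.List.pyRange a b 1).map G))
      = (PySem.List.pyRange (a + 1) (b + 1) 1).map (fun i => (F i, G (i - 1))) := by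
  rw [PySem.List.pyRange_one (a + 1) (b + 1), PySem.List.pyRange_one a b,
    show (b + 1 - (a + 1)).toNat = (b - a).toNat from by omega,
    List.map_map, List.map_map, List.map_map, List.zip_map']
  exact List.map_congr_left (fun k hk => by
    simp only [Function.comp_apply]
    rw [show a + 1 + (k : Int) - 1 = a + k from by omega])

lemma zip_map_shift_desc {α β : Type} (a b : Int) (F : Int → α) (G : Int → β) :
    (((PySem.List.pyRange a b (-1)).map F).zip ((PySem.List.pyRange (a + 1) (b + 1) (-1)).map G))
      = (PySem.List.pyRange a b (-1)).map (fun i => (F i, G (i + 1))) := by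
  rw [PySem.List.pyRange_neg_one a b, PySem.List.pyRange_neg_one (a + 1) (b + 1),
    show (a + 1 - (b + 1)).toNat = (a - b).toNat from by omega,
    List.map_map, List.map_map, List.map_map, List.zip_map']
  exact List.map_congr_left (fun k hk => by
    simp only [Function.comp_apply]
    rw [show a + 1 - (k : Int) = a - k + 1 from by omega])

def ringCoords (x1 y1 x2 y2 : Int) : List (Int × Int) :=
  (PySem.List.pyRange y1 y2 1).map (fun j => (x1, j))
    ++ (PySem.List.pyRange x1 x2 1).map (fun i => (i, y2))
    ++ (PySem.List.pyRange y2 y1 (-1)).map (fun j => (x2, j))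
    ++ (PySem.List.pyRange x2 x1 (-1)).map (fun i => (i, y1))

def ringVals (t : List (List Int)) (x1 y1 x2 y2 : Int) : List Int :=
  (ringCoords x1 y1 x2 y2).map (fun crd => cellGet t crd.1 crd.2)

def ringRot (t : List (List Int)) (x1 y1 x2 y2 : Int) : List Int :=
  PySem.List.slice (ringVals t x1 y1 x2 y2) (some (-1)) none
    ++ PySem.List.slice (ringVals t x1 y1 x2 y2) none (some (-1))

lemma bQuery_def (t : List (List Int)) (x1 y1 x2 y2 : Int) :
    bQuery t x1 y1 x2 y2
      = (((ringCoords x1 y1 x2 y2).zip (ringRot t x1 y1 x2 y2)).foldl stepW t,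
         (PySem.List.min? (ringVals t x1 y1 x2 y2) (fun x => x)).getD 0) := rfl

lemma ringVals_eq (t : List (List Int)) {x1 y1 x2 y2 : Int} (hy12 : y1 < y2) :
    ringVals t x1 y1 x2 y2
      = cellGet t x1 y1
        :: ((PySem.List.pyRange (y1 + 1) y2 1).map (fun j => cellGet t x1 j)
          ++ ((PySem.List.pyRange x1 x2 1).map (fun i => cellGet t i y2)
          ++ ((PySem.List.pyRange y2 y1 (-1)).map (fun j => cellGet t x2 j)
          ++ (PySem.List.pyRange x2 x1 (-1)).map (fun i => cellGet t i y1)))) := by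
  unfold ringVals ringCoords
  rw [PySem.List.pyRange_one_cons hy12]
  simp [List.map_append, List.map_map, Function.comp_def, List.append_assoc]

lemma bQuery_snd (t : List (List Int)) {x1 y1 x2 y2 : Int} (hy12 : y1 < y2) :
    (bQuery t x1 y1 x2 y2).2
      = ((PySem.List.pyRange (y1 + 1) y2 1).map (fun j => cellGet t x1 j)
          ++ ((PySem.List.pyRange x1 x2 1).map (fun i => cellGet t i y2)
          ++ ((PySem.List.pyRange y2 y1 (-1)).map (fun j => cellGet t x2 j)
          ++ (PySem.List.pyRange x2 x1 (-1)).map (fun i => cellGet t i y1)))).foldl min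
        (cellGet t x1 y1) := by
  rw [bQuery_def]
  dsimp only
  rw [ringVals_eq t hy12, PySem.List.min?_id_cons]
  rfl

set_option maxHeartbeats 2000000 in
lemma ringZip_eq (t : List (List Int)) {x1 y1 x2 y2 : Int} (hx12 : x1 < x2) (hy12 : y1 < y2) :
    (ringCoords x1 y1 x2 y2).zip (ringRot t x1 y1 x2 y2)
      = (((x1, y1), cellGet t (x1 + 1) y1)
          :: (PySem.List.pyRange (y1 + 1) y2 1).map (fun j => ((x1, j), cellGet t x1 (j - 1))))
        ++ ((((x1, y2), cellGet t x1 (y2 - 1))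
          :: (PySem.List.pyRange (x1 + 1) x2 1).map (fun i => ((i, y2), cellGet t (i - 1) y2)))
        ++ ((((x2, y2), cellGet t (x2 - 1) y2)
          :: (PySem.List.pyRange (y2 - 1) y1 (-1)).map (fun j => ((x2, j), cellGet t x2 (j + 1))))
        ++ (((x2, y1), cellGet t x2 (y1 + 1))
          :: (PySem.List.pyRange (x2 - 1) x1 (-1)).map (fun i => ((i, y1), cellGet t (i + 1) y1))))) := by
  have hvals : ringVals t x1 y1 x2 y2
      = ((PySem.List.pyRange y1 y2 1).map (fun j => cellGet t x1 j)
        ++ ((PySem.List.pyRange x1 x2 1).map (fun i => cellGet t i y2)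
        ++ ((PySem.List.pyRange y2 y1 (-1)).map (fun j => cellGet t x2 j)
        ++ (PySem.List.pyRange x2 (x1 + 1) (-1)).map (fun i => cellGet t i y1))))
        ++ [cellGet t (x1 + 1) y1] := by
    unfold ringVals ringCoords
    rw [pyRange_neg_one_snoc x2 x1 hx12]
    simp [List.map_append, List.map_map, Function.comp_def, List.append_assoc]
  have hrot : ringRot t x1 y1 x2 y2
      = cellGet t (x1 + 1) y1
        :: ((PySem.List.pyRange y1 y2 1).map (fun j => cellGet t x1 j)
          ++ ((PySem.List.pyRange x1 x2 1).map (fun i => cellGet t i y2)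
          ++ ((PySem.List.pyRange y2 y1 (-1)).map (fun j => cellGet t x2 j)
          ++ (PySem.List.pyRange x2 (x1 + 1) (-1)).map (fun i => cellGet t i y1)))) := by
    unfold ringRot
    rw [hvals, PySem.List.slice_from_neg_one, PySem.List.slice_to_neg_one, List.dropLast_concat]
    rw [show ((((PySem.List.pyRange y1 y2 1).map (fun j => cellGet t x1 j)
        ++ ((PySem.List.pyRange x1 x2 1).map (fun i => cellGet t i y2)
        ++ ((PySem.List.pyRange y2 y1 (-1)).map (fun j => cellGet t x2 j)
        ++ (PySem.List.pyRange x2 (x1 + 1) (-1)).map (fun i => cellGet t i y1))))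
        ++ [cellGet t (x1 + 1) y1]).length - 1)
      = ((PySem.List.pyRange y1 y2 1).map (fun j => cellGet t x1 j)
        ++ ((PySem.List.pyRange x1 x2 1).map (fun i => cellGet t i y2)
        ++ ((PySem.List.pyRange y2 y1 (-1)).map (fun j => cellGet t x2 j)
        ++ (PySem.List.pyRange x2 (x1 + 1) (-1)).map (fun i => cellGet t i y1)))).length
      from by simp; omega]
    rw [List.drop_left]
    rfl
  have hregroup : ringRot t x1 y1 x2 y2
      = (cellGet t (x1 + 1) y1 :: (PySem.List.pyRange y1 (y2 - 1) 1).map (fun j => cellGet t x1 j))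
        ++ ((cellGet t x1 (y2 - 1) :: (PySem.List.pyRange x1 (x2 - 1) 1).map (fun i => cellGet t i y2))
        ++ ((cellGet t (x2 - 1) y2 :: (PySem.List.pyRange y2 (y1 + 1) (-1)).map (fun j => cellGet t x2 j))
        ++ (cellGet t x2 (y1 + 1) :: (PySem.List.pyRange x2 (x1 + 1) (-1)).map (fun i => cellGet t i y1)))) := by
    rw [hrot]
    have hsn1 : PySem.List.pyRange y1 y2 1 = PySem.List.pyRange y1 (y2 - 1) 1 ++ [y2 - 1] := by
      have h := PySem.List.pyRange_one_succ_right (a := y1) (b := y2 - 1) (by omega)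
      rw [show y2 - 1 + 1 = y2 from by omega] at h
      exact h
    have hsn2 : PySem.List.pyRange x1 x2 1 = PySem.List.pyRange x1 (x2 - 1) 1 ++ [x2 - 1] := by
      have h := PySem.List.pyRange_one_succ_right (a := x1) (b := x2 - 1) (by omega)
      rw [show x2 - 1 + 1 = x2 from by omega] at h
      exact h
    have hsn3 : PySem.List.pyRange y2 y1 (-1) = PySem.List.pyRange y2 (y1 + 1) (-1) ++ [y1 + 1] :=
      pyRange_neg_one_snoc y2 y1 hy12
    rw [hsn1, hsn2, hsn3]
    simp [List.map_append, List.append_assoc]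
  rw [hregroup]
  unfold ringCoords
  simp only [List.append_assoc]
  rw [PySem.List.pyRange_one_cons hy12, PySem.List.pyRange_one_cons hx12,
    PySem.List.pyRange_neg_one_cons hy12, PySem.List.pyRange_neg_one_cons hx12,
    List.map_cons, List.map_cons, List.map_cons, List.map_cons]
  rw [List.zip_append (by
    simp [List.length_map, PySem.List.length_pyRange_one]
    omega)]
  rw [List.zip_append (by
    simp [List.length_map, PySem.List.length_pyRange_one]
    omega)]
  rw [List.zip_append (by
    simp [List.length_map, PySem.List.length_pyRange_neg_one]
    omega)]
  rw [List.zip_cons_cons, List.zip_cons_cons, List.zip_cons_cons, List.zip_cons_cons]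
  have hz1 := zip_map_shift_asc y1 (y2 - 1) (fun j => ((x1 : Int), j)) (fun j => cellGet t x1 j)
  rw [show y2 - 1 + 1 = y2 from by omega] at hz1
  have hz2 := zip_map_shift_asc x1 (x2 - 1) (fun i => (i, (y2 : Int))) (fun i => cellGet t i y2)
  rw [show x2 - 1 + 1 = x2 from by omega] at hz2
  have hz3 := zip_map_shift_desc (y2 - 1) y1 (fun j => ((x2 : Int), j)) (fun j => cellGet t x2 j)
  rw [show y2 - 1 + 1 = y2 from by omega] at hz3
  have hz4 := zip_map_shift_desc (x2 - 1) x1 (fun i => (i, (y1 : Int))) (fun i => cellGet t i y1)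
  rw [show x2 - 1 + 1 = x2 from by omega] at hz4
  rw [hz1, hz2, hz3, hz4]

set_option maxHeartbeats 4000000 in
lemma bQuery_get {R C : Int} {t : List (List Int)} (hsh : Shaped R C t)
    {x1 y1 x2 y2 : Int} (hx10 : 0 ≤ x1) (hx12 : x1 < x2) (hx2R : x2 < R)
    (hy10 : 0 ≤ y1) (hy12 : y1 < y2) (hy2C : y2 < C)
    {p q : Int} (hp0 : 0 ≤ p) (hq0 : 0 ≤ q) :
    cellGet (bQuery t x1 y1 x2 y2).1 p q = ringNew t x1 y1 x2 y2 p q := by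
  have hwZ1 : ∀ cv ∈ (((x1, y1), cellGet t (x1 + 1) y1)
      :: (PySem.List.pyRange (y1 + 1) y2 1).map (fun j => ((x1, j), cellGet t x1 (j - 1)))),
      0 ≤ cv.1.1 ∧ cv.1.1 < R ∧ 0 ≤ cv.1.2 ∧ cv.1.2 < C := by
    intro cv hcv
    rcases List.mem_cons.mp hcv with rfl | hcv'
    · dsimp only; omega
    · obtain ⟨j, hj, rfl⟩ := List.mem_map.mp hcv'
      rw [PySem.List.mem_pyRange_one] at hj
      dsimp only; omega
  have hwZ2 : ∀ cv ∈ (((x1, y2), cellGet t x1 (y2 - 1))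
      :: (PySem.List.pyRange (x1 + 1) x2 1).map (fun i => ((i, y2), cellGet t (i - 1) y2))),
      0 ≤ cv.1.1 ∧ cv.1.1 < R ∧ 0 ≤ cv.1.2 ∧ cv.1.2 < C := by
    intro cv hcv
    rcases List.mem_cons.mp hcv with rfl | hcv'
    · dsimp only; omega
    · obtain ⟨i, hi, rfl⟩ := List.mem_map.mp hcv'
      rw [PySem.List.mem_pyRange_one] at hi
      dsimp only; omega
  have hwZ3 : ∀ cv ∈ (((x2, y2), cellGet t (x2 - 1) y2)
      :: (PySem.List.pyRange (y2 - 1) y1 (-1)).map (fun j => ((x2, j), cellGet t x2 (j + 1)))),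
      0 ≤ cv.1.1 ∧ cv.1.1 < R ∧ 0 ≤ cv.1.2 ∧ cv.1.2 < C := by
    intro cv hcv
    rcases List.mem_cons.mp hcv with rfl | hcv'
    · dsimp only; omega
    · obtain ⟨j, hj, rfl⟩ := List.mem_map.mp hcv'
      rw [PySem.List.mem_pyRange_neg_one] at hj
      dsimp only; omega
  have hwZ4 : ∀ cv ∈ (((x2, y1), cellGet t x2 (y1 + 1))
      :: (PySem.List.pyRange (x2 - 1) x1 (-1)).map (fun i => ((i, y1), cellGet t (i + 1) y1))),
      0 ≤ cv.1.1 ∧ cv.1.1 < R ∧ 0 ≤ cv.1.2 ∧ cv.1.2 < C := by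
    intro cv hcv
    rcases List.mem_cons.mp hcv with rfl | hcv'
    · dsimp only; omega
    · obtain ⟨i, hi, rfl⟩ := List.mem_map.mp hcv'
      rw [PySem.List.mem_pyRange_neg_one] at hi
      dsimp only; omega
  have hpwZ1 : (((x1, y1), cellGet t (x1 + 1) y1)
      :: (PySem.List.pyRange (y1 + 1) y2 1).map (fun j => ((x1, j), cellGet t x1 (j - 1)))).Pairwise
      (fun c1 c2 => c1.1 ≠ c2.1) := by
    refine List.Pairwise.cons ?_ ?_
    · intro cv hcv
      obtain ⟨j, hj, rfl⟩ := List.mem_map.mp hcv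
      rw [PySem.List.mem_pyRange_one] at hj
      simp only [ne_eq, Prod.mk.injEq]; omega
    · rw [List.pairwise_map]
      exact (PySem.List.pairwise_lt_pyRange_one _ _).imp
        (fun h => by simp only [ne_eq, Prod.mk.injEq]; omega)
  have hpwZ2 : (((x1, y2), cellGet t x1 (y2 - 1))
      :: (PySem.List.pyRange (x1 + 1) x2 1).map (fun i => ((i, y2), cellGet t (i - 1) y2))).Pairwise
      (fun c1 c2 => c1.1 ≠ c2.1) := by
    refine List.Pairwise.cons ?_ ?_
    · intro cv hcv
      obtain ⟨i, hi, rfl⟩ := List.mem_map.mp hcv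
      rw [PySem.List.mem_pyRange_one] at hi
      simp only [ne_eq, Prod.mk.injEq]; omega
    · rw [List.pairwise_map]
      exact (PySem.List.pairwise_lt_pyRange_one _ _).imp
        (fun h => by simp only [ne_eq, Prod.mk.injEq]; omega)
  have hpwZ3 : (((x2, y2), cellGet t (x2 - 1) y2)
      :: (PySem.List.pyRange (y2 - 1) y1 (-1)).map (fun j => ((x2, j), cellGet t x2 (j + 1)))).Pairwise
      (fun c1 c2 => c1.1 ≠ c2.1) := by
    refine List.Pairwise.cons ?_ ?_
    · intro cv hcv
      obtain ⟨j, hj, rfl⟩ := List.mem_map.mp hcv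
      rw [PySem.List.mem_pyRange_neg_one] at hj
      simp only [ne_eq, Prod.mk.injEq]; omega
    · rw [List.pairwise_map]
      exact (pairwise_gt_pyRange_neg_one _ _).imp
        (fun h => by simp only [ne_eq, Prod.mk.injEq]; omega)
  have hpwZ4 : (((x2, y1), cellGet t x2 (y1 + 1))
      :: (PySem.List.pyRange (x2 - 1) x1 (-1)).map (fun i => ((i, y1), cellGet t (i + 1) y1))).Pairwise
      (fun c1 c2 => c1.1 ≠ c2.1) := by
    refine List.Pairwise.cons ?_ ?_
    · intro cv hcv
      obtain ⟨i, hi, rfl⟩ := List.mem_map.mp hcv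
      rw [PySem.List.mem_pyRange_neg_one] at hi
      simp only [ne_eq, Prod.mk.injEq]; omega
    · rw [List.pairwise_map]
      exact (pairwise_gt_pyRange_neg_one _ _).imp
        (fun h => by simp only [ne_eq, Prod.mk.injEq]; omega)
  rw [bQuery_def]
  dsimp only
  rw [ringZip_eq t hx12 hy12, List.foldl_append, List.foldl_append, List.foldl_append]
  have hshZ1 := write_shape _ hsh hwZ1
  have hshZ2 := write_shape _ hshZ1 hwZ2
  have hshZ3 := write_shape _ hshZ2 hwZ3
  unfold ringNew
  by_cases h1 : p = x1 ∧ y1 + 1 ≤ q ∧ q ≤ y2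
  · rw [if_pos h1]
    obtain ⟨hp, hq1, hq2⟩ := h1
    subst hp
    by_cases hqy : q = y2
    · subst hqy
      rw [write_get_nmem _ hshZ3 hwZ4 hp0 hq0 (by
        intro cv hcv
        rcases List.mem_cons.mp hcv with rfl | hcv'
        · simp only [ne_eq, Prod.mk.injEq]; omega
        · obtain ⟨i, hi, rfl⟩ := List.mem_map.mp hcv'
          rw [PySem.List.mem_pyRange_neg_one] at hi
          simp only [ne_eq, Prod.mk.injEq]; omega)]
      rw [write_get_nmem _ hshZ2 hwZ3 hp0 hq0 (by
        intro cv hcv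
        rcases List.mem_cons.mp hcv with rfl | hcv'
        · simp only [ne_eq, Prod.mk.injEq]; omega
        · obtain ⟨j, hj, rfl⟩ := List.mem_map.mp hcv'
          rw [PySem.List.mem_pyRange_neg_one] at hj
          simp only [ne_eq, Prod.mk.injEq]; omega)]
      rw [write_get_mem _ hshZ1 hwZ2 hpwZ2 List.mem_cons_self rfl]
    · rw [write_get_nmem _ hshZ3 hwZ4 hp0 hq0 (by
        intro cv hcv
        rcases List.mem_cons.mp hcv with rfl | hcv'
        · simp only [ne_eq, Prod.mk.injEq]; omega
        · obtain ⟨i, hi, rfl⟩ := List.mem_map.mp hcv'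
          rw [PySem.List.mem_pyRange_neg_one] at hi
          simp only [ne_eq, Prod.mk.injEq]; omega)]
      rw [write_get_nmem _ hshZ2 hwZ3 hp0 hq0 (by
        intro cv hcv
        rcases List.mem_cons.mp hcv with rfl | hcv'
        · simp only [ne_eq, Prod.mk.injEq]; omega
        · obtain ⟨j, hj, rfl⟩ := List.mem_map.mp hcv'
          rw [PySem.List.mem_pyRange_neg_one] at hj
          simp only [ne_eq, Prod.mk.injEq]; omega)]
      rw [write_get_nmem _ hshZ1 hwZ2 hp0 hq0 (by
        intro cv hcv
        rcases List.mem_cons.mp hcv with rfl | hcv'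
        · simp only [ne_eq, Prod.mk.injEq]; omega
        · obtain ⟨i, hi, rfl⟩ := List.mem_map.mp hcv'
          rw [PySem.List.mem_pyRange_one] at hi
          simp only [ne_eq, Prod.mk.injEq]; omega)]
      rw [write_get_mem _ hsh hwZ1 hpwZ1
        (List.mem_cons_of_mem _ (List.mem_map.mpr
          ⟨q, PySem.List.mem_pyRange_one.mpr ⟨by omega, by omega⟩, rfl⟩)) rfl]
  · rw [if_neg h1]
    by_cases h2 : q = y2 ∧ x1 + 1 ≤ p ∧ p ≤ x2
    · rw [if_pos h2]
      obtain ⟨hq, hp1, hp2⟩ := h2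
      subst hq
      by_cases hpx : p = x2
      · subst hpx
        rw [write_get_nmem _ hshZ3 hwZ4 hp0 hq0 (by
          intro cv hcv
          rcases List.mem_cons.mp hcv with rfl | hcv'
          · simp only [ne_eq, Prod.mk.injEq]; omega
          · obtain ⟨i, hi, rfl⟩ := List.mem_map.mp hcv'
            rw [PySem.List.mem_pyRange_neg_one] at hi
            simp only [ne_eq, Prod.mk.injEq]; omega)]
        rw [write_get_mem _ hshZ2 hwZ3 hpwZ3 List.mem_cons_self rfl]
      · rw [write_get_nmem _ hshZ3 hwZ4 hp0 hq0 (by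
          intro cv hcv
          rcases List.mem_cons.mp hcv with rfl | hcv'
          · simp only [ne_eq, Prod.mk.injEq]; omega
          · obtain ⟨i, hi, rfl⟩ := List.mem_map.mp hcv'
            rw [PySem.List.mem_pyRange_neg_one] at hi
            simp only [ne_eq, Prod.mk.injEq]; omega)]
        rw [write_get_nmem _ hshZ2 hwZ3 hp0 hq0 (by
          intro cv hcv
          rcases List.mem_cons.mp hcv with rfl | hcv'
          · simp only [ne_eq, Prod.mk.injEq]; omega
          · obtain ⟨j, hj, rfl⟩ := List.mem_map.mp hcv'
            rw [PySem.List.mem_pyRange_neg_one] at hj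
            simp only [ne_eq, Prod.mk.injEq]; omega)]
        rw [write_get_mem _ hshZ1 hwZ2 hpwZ2
          (List.mem_cons_of_mem _ (List.mem_map.mpr
            ⟨p, PySem.List.mem_pyRange_one.mpr ⟨by omega, by omega⟩, rfl⟩)) rfl]
    · rw [if_neg h2]
      by_cases h3 : p = x2 ∧ y1 ≤ q ∧ q ≤ y2 - 1
      · rw [if_pos h3]
        obtain ⟨hp, hq1, hq2⟩ := h3
        subst hp
        by_cases hqy : q = y1
        · subst hqy
          rw [write_get_mem _ hshZ3 hwZ4 hpwZ4 List.mem_cons_self rfl]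
        · rw [write_get_nmem _ hshZ3 hwZ4 hp0 hq0 (by
            intro cv hcv
            rcases List.mem_cons.mp hcv with rfl | hcv'
            · simp only [ne_eq, Prod.mk.injEq]; omega
            · obtain ⟨i, hi, rfl⟩ := List.mem_map.mp hcv'
              rw [PySem.List.mem_pyRange_neg_one] at hi
              simp only [ne_eq, Prod.mk.injEq]; omega)]
          rw [write_get_mem _ hshZ2 hwZ3 hpwZ3
            (List.mem_cons_of_mem _ (List.mem_map.mpr
              ⟨q, PySem.List.mem_pyRange_neg_one.mpr ⟨by omega, by omega⟩, rfl⟩)) rfl]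
      · rw [if_neg h3]
        by_cases h4 : q = y1 ∧ x1 ≤ p ∧ p ≤ x2 - 1
        · rw [if_pos h4]
          obtain ⟨hq, hp1, hp2⟩ := h4
          subst hq
          by_cases hpx : p = x1
          · subst hpx
            rw [write_get_nmem _ hshZ3 hwZ4 hp0 hq0 (by
              intro cv hcv
              rcases List.mem_cons.mp hcv with rfl | hcv'
              · simp only [ne_eq, Prod.mk.injEq]; omega
              · obtain ⟨i, hi, rfl⟩ := List.mem_map.mp hcv'
                rw [PySem.List.mem_pyRange_neg_one] at hi
                simp only [ne_eq, Prod.mk.injEq]; omega)]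
            rw [write_get_nmem _ hshZ2 hwZ3 hp0 hq0 (by
              intro cv hcv
              rcases List.mem_cons.mp hcv with rfl | hcv'
              · simp only [ne_eq, Prod.mk.injEq]; omega
              · obtain ⟨j, hj, rfl⟩ := List.mem_map.mp hcv'
                rw [PySem.List.mem_pyRange_neg_one] at hj
                simp only [ne_eq, Prod.mk.injEq]; omega)]
            rw [write_get_nmem _ hshZ1 hwZ2 hp0 hq0 (by
              intro cv hcv
              rcases List.mem_cons.mp hcv with rfl | hcv'
              · simp only [ne_eq, Prod.mk.injEq]; omega
              · obtain ⟨i, hi, rfl⟩ := List.mem_map.mp hcv'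
                rw [PySem.List.mem_pyRange_one] at hi
                simp only [ne_eq, Prod.mk.injEq]; omega)]
            rw [write_get_mem _ hsh hwZ1 hpwZ1 List.mem_cons_self rfl]
          · rw [write_get_mem _ hshZ3 hwZ4 hpwZ4
              (List.mem_cons_of_mem _ (List.mem_map.mpr
                ⟨p, PySem.List.mem_pyRange_neg_one.mpr ⟨by omega, by omega⟩, rfl⟩)) rfl]
        · rw [if_neg h4]
          rw [write_get_nmem _ hshZ3 hwZ4 hp0 hq0 (by
            intro cv hcv
            rcases List.mem_cons.mp hcv with rfl | hcv'
            · simp only [ne_eq, Prod.mk.injEq]; omega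
            · obtain ⟨i, hi, rfl⟩ := List.mem_map.mp hcv'
              rw [PySem.List.mem_pyRange_neg_one] at hi
              simp only [ne_eq, Prod.mk.injEq]; omega)]
          rw [write_get_nmem _ hshZ2 hwZ3 hp0 hq0 (by
            intro cv hcv
            rcases List.mem_cons.mp hcv with rfl | hcv'
            · simp only [ne_eq, Prod.mk.injEq]; omega
            · obtain ⟨j, hj, rfl⟩ := List.mem_map.mp hcv'
              rw [PySem.List.mem_pyRange_neg_one] at hj
              simp only [ne_eq, Prod.mk.injEq]; omega)]
          rw [write_get_nmem _ hshZ1 hwZ2 hp0 hq0 (by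
            intro cv hcv
            rcases List.mem_cons.mp hcv with rfl | hcv'
            · simp only [ne_eq, Prod.mk.injEq]; omega
            · obtain ⟨i, hi, rfl⟩ := List.mem_map.mp hcv'
              rw [PySem.List.mem_pyRange_one] at hi
              simp only [ne_eq, Prod.mk.injEq]; omega)]
          rw [write_get_nmem _ hsh hwZ1 hp0 hq0 (by
            intro cv hcv
            rcases List.mem_cons.mp hcv with rfl | hcv'
            · simp only [ne_eq, Prod.mk.injEq]; omega
            · obtain ⟨j, hj, rfl⟩ := List.mem_map.mp hcv'
              rw [PySem.List.mem_pyRange_one] at hj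
              simp only [ne_eq, Prod.mk.injEq]; omega)]

-- ---------- assembling one query, the initial table, and the whole fold ----------

lemma aQuery_shape {R C : Int} {t : List (List Int)} (hsh : Shaped R C t)
    {x1 y1 x2 y2 : Int} (hx10 : 0 ≤ x1) (hx12 : x1 < x2) (hx2R : x2 < R)
    (hy10 : 0 ≤ y1) (hy12 : y1 < y2) (hy2C : y2 < C) :
    Shaped R C (aQuery t x1 y1 x2 y2).1 := by
  have hB1 : ∀ i ∈ PySem.List.pyRange (x1 + 1) (x2 + 1) 1,
      0 ≤ ((fun i => (i - 1, y1)) i).1 ∧ ((fun i => (i - 1, y1)) i).1 < R ∧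
      0 ≤ ((fun i => (i - 1, y1)) i).2 ∧ ((fun i => (i - 1, y1)) i).2 < C := by
    intro i hi; rw [PySem.List.mem_pyRange_one] at hi; dsimp only; omega
  have hB2 : ∀ i ∈ PySem.List.pyRange (y1 + 1) (y2 + 1) 1,
      0 ≤ ((fun i => (x2, i - 1)) i).1 ∧ ((fun i => (x2, i - 1)) i).1 < R ∧
      0 ≤ ((fun i => (x2, i - 1)) i).2 ∧ ((fun i => (x2, i - 1)) i).2 < C := by
    intro i hi; rw [PySem.List.mem_pyRange_one] at hi; dsimp only; omega
  have hB3 : ∀ i ∈ PySem.List.pyRange (x2 - 1) (x1 - 1) (-1),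
      0 ≤ ((fun i => (i + 1, y2)) i).1 ∧ ((fun i => (i + 1, y2)) i).1 < R ∧
      0 ≤ ((fun i => (i + 1, y2)) i).2 ∧ ((fun i => (i + 1, y2)) i).2 < C := by
    intro i hi; rw [PySem.List.mem_pyRange_neg_one] at hi; dsimp only; omega
  have hB4 : ∀ i ∈ PySem.List.pyRange (y2 - 1) (y1 - 1) (-1),
      0 ≤ ((fun i => (x1, i + 1)) i).1 ∧ ((fun i => (x1, i + 1)) i).1 < R ∧
      0 ≤ ((fun i => (x1, i + 1)) i).2 ∧ ((fun i => (x1, i + 1)) i).2 < C := by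
    intro i hi; rw [PySem.List.mem_pyRange_neg_one] at hi; dsimp only; omega
  unfold aQuery
  dsimp only
  exact cellSet_shaped
    (loopA_shape _ _ _ (loopA_shape _ _ _ (loopA_shape _ _ _ (loopA_shape _ _ _ hsh hB1) hB2) hB3) hB4)
    hx10 _

lemma bQuery_shape {R C : Int} {t : List (List Int)} (hsh : Shaped R C t)
    {x1 y1 x2 y2 : Int} (hx10 : 0 ≤ x1) (hx12 : x1 < x2) (hx2R : x2 < R)
    (hy10 : 0 ≤ y1) (hy12 : y1 < y2) (hy2C : y2 < C) :
    Shaped R C (bQuery t x1 y1 x2 y2).1 := by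
  rw [bQuery_def]
  dsimp only
  refine write_shape _ hsh ?_
  intro cv hcv
  obtain ⟨⟨ci, cj⟩, v⟩ := cv
  have hm := (List.of_mem_zip hcv).1
  unfold ringCoords at hm
  simp only [List.mem_append, List.mem_map, PySem.List.mem_pyRange_one,
    PySem.List.mem_pyRange_neg_one] at hm
  rcases hm with ((⟨j, hj, he⟩ | ⟨i, hi, he⟩) | ⟨j, hj, he⟩) | ⟨i, hi, he⟩ <;>
    (cases he; dsimp only; omega)

set_option maxHeartbeats 4000000 in
lemma query_eq {R C : Int} {t : List (List Int)} (hsh : Shaped R C t)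
    {x1 y1 x2 y2 : Int} (hx10 : 0 ≤ x1) (hx12 : x1 < x2) (hx2R : x2 < R)
    (hy10 : 0 ≤ y1) (hy12 : y1 < y2) (hy2C : y2 < C) :
    aQuery t x1 y1 x2 y2 = bQuery t x1 y1 x2 y2 := by
  have htab : (aQuery t x1 y1 x2 y2).1 = (bQuery t x1 y1 x2 y2).1 :=
    table_ext (aQuery_shape hsh hx10 hx12 hx2R hy10 hy12 hy2C)
      (bQuery_shape hsh hx10 hx12 hx2R hy10 hy12 hy2C)
      (fun p q hp0 hpR hq0 hqC => by
        rw [aQuery_get hsh hx10 hx12 hx2R hy10 hy12 hy2C hp0 hq0,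
          bQuery_get hsh hx10 hx12 hx2R hy10 hy12 hy2C hp0 hq0])
  have hmin : (aQuery t x1 y1 x2 y2).2 = (bQuery t x1 y1 x2 y2).2 := by
    rw [aQuery_snd hsh hx10 hx12 hx2R hy10 hy12 hy2C, bQuery_snd t hy12]
    rw [List.foldl_append]
    simp only [List.foldl_cons, List.foldl_nil]
    have hmem : cellGet t (x1 + 1) y1
        ∈ ((PySem.List.pyRange (x1 + 1) (x2 + 1) 1).map (fun i => cellGet t i y1)
          ++ (PySem.List.pyRange (y1 + 1) (y2 + 1) 1).map (fun i => cellGet t x2 i)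
          ++ (PySem.List.pyRange (x2 - 1) (x1 - 1) (-1)).map (fun i => cellGet t i y2)
          ++ (PySem.List.pyRange (y2 - 1) y1 (-1)).map (fun i => cellGet t x1 i)) := by
      simp only [List.mem_append, List.mem_map]
      exact Or.inl (Or.inl (Or.inl
        ⟨x1 + 1, PySem.List.mem_pyRange_one.mpr ⟨by omega, by omega⟩, rfl⟩))
    rw [min_eq_left ((PySem.List.foldl_min_le _ _).2 _ hmem)]
    have hrevA3 : PySem.List.pyRange (x2 - 1) (x1 - 1) (-1)
        = (PySem.List.pyRange x1 x2 1).reverse := by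
      have h := PySem.List.pyRange_neg_one_eq_reverse (x2 - 1) (x1 - 1)
      rw [show x1 - 1 + 1 = x1 from by omega, show x2 - 1 + 1 = x2 from by omega] at h
      exact h
    have hrevA4 : PySem.List.pyRange (y2 - 1) y1 (-1)
        = (PySem.List.pyRange (y1 + 1) y2 1).reverse := by
      have h := PySem.List.pyRange_neg_one_eq_reverse (y2 - 1) y1
      rw [show y2 - 1 + 1 = y2 from by omega] at h
      exact h
    have hrevB3 : PySem.List.pyRange y2 y1 (-1)
        = (PySem.List.pyRange (y1 + 1) (y2 + 1) 1).reverse :=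
      PySem.List.pyRange_neg_one_eq_reverse y2 y1
    have hrevB4 : PySem.List.pyRange x2 x1 (-1)
        = (PySem.List.pyRange (x1 + 1) (x2 + 1) 1).reverse :=
      PySem.List.pyRange_neg_one_eq_reverse x2 x1
    rw [hrevA3, hrevA4, hrevB3, hrevB4, List.map_reverse, List.map_reverse,
      List.map_reverse, List.map_reverse]
    exact (List.perm_iff_count.mpr (fun v => by
      simp only [List.count_append, List.count_reverse]
      omega)).foldl_eq _
  exact Prod.ext htab hmin

lemma innerA_eq (columns : Int) (xs : List Int) (c : Int) :
    (PySem.List.pyRange 0 columns 1).foldl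
      (fun (cs : List Int × Int) _ => (cs.1 ++ [cs.2], cs.2 + 1)) (xs, c)
      = (xs ++ (List.range columns.toNat).map (fun (j : Nat) => c + (j : Int)),
         c + (columns.toNat : Int)) := by
  rw [PySem.List.pyRange_one, List.foldl_map, show (columns - 0).toNat = columns.toNat from by omega]
  generalize columns.toNat = n
  induction n generalizing xs c with
  | zero => simp
  | succ n ih =>
    rw [List.range_succ, List.foldl_append, ih, List.foldl_cons, List.foldl_nil, List.map_append]
    apply Prod.ext
    · dsimp only
      simp [List.append_assoc]
    · dsimp only
      push_cast
      ring

lemma outerA_eq (rows columns : Int) (xs : List (List Int)) (c : Int) :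
    (PySem.List.pyRange 0 rows 1).foldl
      (fun (st : List (List Int) × Int) _i =>
        let cc : List Int × Int :=
          (PySem.List.pyRange 0 columns 1).foldl
            (fun (cs : List Int × Int) _j => (cs.1 ++ [cs.2], cs.2 + 1)) ([], st.2)
        (st.1 ++ [cc.1], cc.2)) (xs, c)
      = (xs ++ (List.range rows.toNat).map
          (fun (r : Nat) => (List.range columns.toNat).map
            (fun (j : Nat) => c + (r : Int) * (columns.toNat : Int) + (j : Int))),
         c + (rows.toNat : Int) * (columns.toNat : Int)) := by
  rw [PySem.List.pyRange_one 0 rows, List.foldl_map, show (rows - 0).toNat = rows.toNat from by omega]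
  generalize rows.toNat = n
  induction n generalizing xs c with
  | zero => simp
  | succ n ih =>
    rw [List.range_succ, List.foldl_append, ih, List.foldl_cons, List.foldl_nil]
    dsimp only
    rw [innerA_eq, List.map_append]
    apply Prod.ext
    · dsimp only
      simp only [List.map_cons, List.map_nil, List.append_assoc, List.nil_append]
    · dsimp only
      push_cast
      ring

lemma aInit_eq (rows columns : Int) (h1 : 0 ≤ rows) (h2 : 0 ≤ columns) :
    aInit rows columns = bTable0 rows columns := by
  unfold aInit bTable0
  rw [outerA_eq]
  dsimp only
  rw [PySem.List.pyRange_one 0 rows, PySem.List.pyRange_one 0 columns,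
    show (rows - 0).toNat = rows.toNat from by omega,
    show (columns - 0).toNat = columns.toNat from by omega,
    List.map_map, List.nil_append]
  refine List.map_congr_left (fun r hr => ?_)
  simp only [Function.comp_apply, List.map_map]
  refine List.map_congr_left (fun j hj => ?_)
  simp only [Function.comp_apply]
  rw [show ((columns.toNat : Int)) = columns from by omega]
  ring

lemma bTable0_shape (rows columns : Int) :
    Shaped rows columns (bTable0 rows columns) := by
  constructor
  · simp [bTable0, PySem.List.length_pyRange_one]
  · intro r hr
    simp only [bTable0, List.mem_map] at hr
    obtain ⟨i, _, rfl⟩ := hr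
    simp [PySem.List.length_pyRange_one]

lemma fold_eq {R C : Int} (qs : List (List Int))
    (hq : ∀ q ∈ qs, q.length = 4 ∧ 1 ≤ q.getD 0 0 ∧ q.getD 0 0 < q.getD 2 0 ∧ q.getD 2 0 ≤ R ∧
      1 ≤ q.getD 1 0 ∧ q.getD 1 0 < q.getD 3 0 ∧ q.getD 3 0 ≤ C)
    (ans : List Int) (t : List (List Int)) (hsh : Shaped R C t) :
    (qs.foldl aStep (ans, t)).1 = (qs.foldl bStep (ans, t)).1 := by
  induction qs generalizing ans t with
  | nil => rfl
  | cons q0 qs ih =>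
    obtain ⟨hlen, h1, h2, h3, h4, h5, h6⟩ := hq q0 List.mem_cons_self
    obtain ⟨a, b, c, d, rfl⟩ : ∃ a b c d, q0 = [a, b, c, d] := by
      rcases q0 with _ | ⟨a, q0⟩; · simp at hlen
      rcases q0 with _ | ⟨b, q0⟩; · simp at hlen
      rcases q0 with _ | ⟨c, q0⟩; · simp at hlen
      rcases q0 with _ | ⟨d, q0⟩; · simp at hlen
      rcases q0 with _ | ⟨e, q0⟩
      · exact ⟨a, b, c, d, rfl⟩
      · simp at hlen
    simp only [List.getD_cons_zero, List.getD_cons_succ] at h1 h2 h3 h4 h5 h6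
    rw [List.foldl_cons, List.foldl_cons, aStep_quad, bStep_quad]
    have hQ : aQuery t (a - 1) (b - 1) (c - 1) (d - 1) = bQuery t (a - 1) (b - 1) (c - 1) (d - 1) :=
      query_eq hsh (by omega) (by omega) (by omega) (by omega) (by omega) (by omega)
    rw [hQ]
    exact ih (fun q hqm => hq q (List.mem_cons_of_mem _ hqm)) _ _
      (bQuery_shape hsh (by omega) (by omega) (by omega) (by omega) (by omega) (by omega))

-- ===== VERDICT (by name: the statement is the Claim_ definition above) =====
theorem solution_spec : Claim_equal_solution := by
  intro rows columns queries hdom hpre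
  unfold Spec_solution
  rw [solution_unfold, solution_alt_unfold]
  rcases queries with _ | ⟨q0, qs⟩
  · rfl
  · obtain ⟨hlen, h1, h2, h3, h4, h5, h6⟩ := hpre q0 List.mem_cons_self
    rw [aInit_eq rows columns (by omega) (by omega)]
    exact fold_eq _ hpre _ _ (bTable0_shape rows columns)
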